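-- pv_equiv track=rewrite | github.com/YOOOOONA/algorithm_study | [백준]2048(Easy).py | solve
-- ===== SOURCE A (Python) =====
-- from heapq import heappush,heappop
--
-- def move(dr,mat,N):
--     #상하좌우로 쭉 밀리면서 더해지는 액션
--     mvdMat = [[0 for _ in range(N)] for _ in range(N)]
--     if dr in [0,1]:#상,하
--         pm  = 1 if dr == 0 else -1
--         for j in range(N):#가로줄로 탐색
--             col = list(filter(lambda x:x!=0,list(zip(*mat))[j]))#0이 사이에 끼어있으면 지워줘야지
--             n = len(col)
--             newCol = []
--             # for j in range(0,N-1,pm):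
--             i = 0 if pm == 1 else n-1
--             while(n):
--                 if 0<=i+pm<n and col[i]==col[i+pm]:#mat[i][j] == mat[i+pm][j]:
--                     # newCol.append(mat[i][j] * 2)
--                     newCol.append(col[i] * 2)
--                     i += 2 * pm
--                 else:
--                     # newCol.append(mat[i][j])
--                     newCol.append(col[i])
--                     i += 1 * pm
--
--                 if i<0 or i>=n: break#n==1일때 이 조건이 위에 있으면 안들어옴.무조건 한번은 들어와야지
--             if pm==1:#상
--                 for i in range(0,len(newCol)):
--                     mvdMat[i][j] = newCol[i]
--             else:#하
--                 for i in range(0,len(newCol)):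
--                     mvdMat[N-1 -i][j] = newCol[i]
--     if dr in [2,3]:#좌,우
--         pm  = 1 if dr == 2 else -1
--         for i in range(N):#가로줄로 탐색
--             row = list(filter(lambda x:x!=0,mat[i]))#0이 사이에 끼어있으면 지워줘야지
--             n = len(row)
--             newRow = []
--             # for j in range(0,N-1,pm):
--             j = 0 if pm == 1 else n-1
--             while(n):
--                 if 0<=j+pm<n and row[j] == row[j+pm]:#mat[i][j] == mat[i][j+pm]:
--                     # newRow.append(mat[i][j] * 2)
--                     newRow.append(row[j] * 2)
--                     j += 2 * pm
--                 else:
--                     # newRow.append(mat[i][j])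
--                     newRow.append(row[j])
--                     j += 1 * pm
--
--                 if j<0 or j>=n: break#n==1일때 이 조건이 위에 있으면 안들어옴.무조건 한번은 들어와야지
--             if pm==1:#좌
--                 for j in range(0,len(newRow)):
--                     mvdMat[i][j] = newRow[j]
--             else:#우
--                 for j in range(0,len(newRow)):
--                     mvdMat[i][N-1 -j] = newRow[j]
--
--     # pm = 1 if dr in [0,2] else -1
--     # for i in range(N)
--     # I,J = i+pm,j if dr in [0,1] else i,j+pm
--
--     return mvdMat
--
-- def calcMax(mat):
--     maxNum = -1
--     for i in mat:
--         maxNum = max(maxNum,max(i))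
--     return maxNum
--
-- def solve(mat,N):
--     maxNum = -1
--     cnt = 0#회전한 횟수
--     q = []
--     heappush(q,[cnt,mat])
--     # for _ in range(5):#최대 5번 이동
--     while q:
--         c,newMat = heappop(q)
--         if c>=5:break
--         for dr in range(4):
--             mvdMat = move(dr,newMat,N)
--             heappush(q,[c+1,mvdMat])
--             maxNum = max(maxNum,calcMax(mvdMat))
--     return maxNum#5번 이내로 이동해서 나오는 최댓값을 리턴
-- ===== SOURCE B (Python) =====
-- def solve(mat, N):
--     # functional re-implementation: recursive pair-merge + line slides built as new
--     # lists (no zero matrix, no index writes), and a recursive DFS instead of a heap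
--
--     def merge(xs):
--         if len(xs) >= 2 and xs[0] == xs[1]:
--             return [2 * xs[0]] + merge(xs[2:])
--         if xs:
--             return [xs[0]] + merge(xs[1:])
--         return []
--
--     def slide(line):
--         m = merge([x for x in line if x != 0])
--         return m + [0] * (N - len(m))
--
--     def rslide(line):
--         return slide(line[::-1])[::-1]
--
--     def move(dr, m):
--         if dr == 0:
--             cols = [slide([m[i][j] for i in range(N)]) for j in range(N)]
--             return [[cols[j][i] for j in range(N)] for i in range(N)]
--         if dr == 1:
--             cols = [rslide([m[i][j] for i in range(N)]) for j in range(N)]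
--             return [[cols[j][i] for j in range(N)] for i in range(N)]
--         if dr == 2:
--             return [slide(m[i]) for i in range(N)]
--         return [rslide(m[i]) for i in range(N)]
--
--     def score(m):
--         best = -1
--         for row in m:
--             for x in row:
--                 best = max(best, x)
--         return best
--
--     def best_from(m, remaining):
--         if remaining == 0:
--             return -1
--         best = -1
--         for dr in range(4):
--             mvd = move(dr, m)
--             best = max(best, score(mvd), best_from(mvd, remaining - 1))
--         return best
--
--     return best_from(mat, 5)
-- ===== Notes on version B (the rewrite author's own statement) =====
-- stated objective: alternative
-- what changed: B rebuilds move functionally (a recursive pairwise merge plus slide/rslide that construct each moved line as a new list, columns taken and transposed by comprehension) instead of A's while-loop merge writing into a preallocated zero matrix by index assignment, and replaces A's heap-driven work-list (heappush/heappop of [depth, matrix] with a break at depth>=5) by a recursive DFS best_from(m, remaining) with a per-cell running-max score.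
-- outside the precondition, e.g. on solve([[0, 2]], 1): A returns 2, B returns 2
import Mathlib
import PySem

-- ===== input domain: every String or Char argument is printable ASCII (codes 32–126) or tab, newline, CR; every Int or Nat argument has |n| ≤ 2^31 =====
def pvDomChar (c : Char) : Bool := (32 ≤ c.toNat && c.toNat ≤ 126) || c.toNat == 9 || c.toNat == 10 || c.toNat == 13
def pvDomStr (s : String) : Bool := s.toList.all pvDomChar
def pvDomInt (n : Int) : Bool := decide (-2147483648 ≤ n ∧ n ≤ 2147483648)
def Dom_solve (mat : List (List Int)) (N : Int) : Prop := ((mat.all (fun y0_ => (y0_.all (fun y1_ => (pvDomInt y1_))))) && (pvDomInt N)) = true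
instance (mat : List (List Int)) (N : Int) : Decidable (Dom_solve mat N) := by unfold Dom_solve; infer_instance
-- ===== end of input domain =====

-- B re-implements the task functionally: a recursive pair-merge plus per-line slides that
-- BUILD each moved row/column as a new list (A mutates a zero matrix through index writes
-- driven by a while loop), and a recursive DFS over the move tree instead of A's heap queue.

-- ===== PORT A =====
-- helper: Python list-assignment l[k] = v (in range wherever reached under Pre_)
def pySet (l : List Int) (k : Int) (v : Int) : List Int :=
  if 0 ≤ k ∧ k < (l.length : Int) then l.set k.toNat v else l

-- helper: mvdMat[r][c] = v
def set2 (m : List (List Int)) (r c : Int) (v : Int) : List (List Int) :=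
  if 0 ≤ r ∧ r < (m.length : Int) then
    m.set r.toNat (pySet ((PySem.List.pyGet? m r).getD []) c v)
  else m

-- helper: list(zip(*mat)) — rows truncated to the shortest row, as Python's zip does
def zipMinLen (m : List (List Int)) : Nat :=
  match m with
  | [] => 0
  | r :: rs => rs.foldl (fun a x => min a x.length) r.length

def zipStar (m : List (List Int)) : List (List Int) :=
  (List.range (zipMinLen m)).map (fun i => m.map (fun r => r.getD i 0))

-- helper: the 'while(n):' merge loop of move (fuel n.toNat+1 is a totalization guard:
-- the Python loop appends one cell and moves i strictly toward the break boundary each pass)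
def mergeLoop (col : List Int) (n pm : Int) : Int → List Int → Nat → List Int
  | _, newCol, 0 => newCol
  | i, newCol, fuel + 1 =>
    if n = 0 then newCol
    else
      let p :=
        if 0 ≤ i + pm ∧ i + pm < n ∧
            (PySem.List.pyGet? col i).getD 0 = (PySem.List.pyGet? col (i + pm)).getD 0
        then (((PySem.List.pyGet? col i).getD 0) * 2, i + 2 * pm)
        else ((PySem.List.pyGet? col i).getD 0, i + 1 * pm)
      let newCol' := newCol ++ [p.1]
      if p.2 < 0 ∨ n ≤ p.2 then newCol' else mergeLoop col n pm p.2 newCol' fuel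

-- move(dr, mat, N)
def move (dr : Int) (mat : List (List Int)) (N : Int) : List (List Int) :=
  let zeros := (PySem.List.pyRange 0 N 1).map (fun _ => (0 : Int))
  let mvd0 := (PySem.List.pyRange 0 N 1).map (fun _ => zeros)
  let mvd1 :=
    if dr = 0 ∨ dr = 1 then
      let pm : Int := if dr = 0 then 1 else -1
      (PySem.List.pyRange 0 N 1).foldl (fun mvd j =>
        let col := ((PySem.List.pyGet? (zipStar mat) j).getD []).filter (fun x => x ≠ 0)
        let n : Int := (col.length : Int)
        let newCol := mergeLoop col n pm (if pm = 1 then 0 else n - 1) [] (n.toNat + 1)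
        if pm = 1 then
          (PySem.List.pyRange 0 (newCol.length : Int) 1).foldl
            (fun mvd i => set2 mvd i j ((PySem.List.pyGet? newCol i).getD 0)) mvd
        else
          (PySem.List.pyRange 0 (newCol.length : Int) 1).foldl
            (fun mvd i => set2 mvd (N - 1 - i) j ((PySem.List.pyGet? newCol i).getD 0)) mvd) mvd0
    else mvd0
  if dr = 2 ∨ dr = 3 then
    let pm : Int := if dr = 2 then 1 else -1
    (PySem.List.pyRange 0 N 1).foldl (fun mvd i =>
      let row := ((PySem.List.pyGet? mat i).getD []).filter (fun x => x ≠ 0)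
      let n : Int := (row.length : Int)
      let newRow := mergeLoop row n pm (if pm = 1 then 0 else n - 1) [] (n.toNat + 1)
      if pm = 1 then
        (PySem.List.pyRange 0 (newRow.length : Int) 1).foldl
          (fun mvd j => set2 mvd i j ((PySem.List.pyGet? newRow j).getD 0)) mvd
      else
        (PySem.List.pyRange 0 (newRow.length : Int) 1).foldl
          (fun mvd j => set2 mvd i (N - 1 - j) ((PySem.List.pyGet? newRow j).getD 0)) mvd) mvd1
  else mvd1

-- calcMax(mat); max(i) of an empty row raises in Python — the .getD 0 default is
-- unreachable under Pre_
def calcMax (mat : List (List Int)) : Int :=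
  mat.foldl (fun maxNum i => max maxNum ((PySem.List.max? i (fun y => y)).getD 0)) (-1)

-- Python's comparison of the heap items [c, mat] (lexicographic list order)
def intListLt : List Int → List Int → Bool
  | [], [] => false
  | [], _ :: _ => true
  | _ :: _, [] => false
  | x :: xs, y :: ys => if x < y then true else if y < x then false else intListLt xs ys

def matListLt : List (List Int) → List (List Int) → Bool
  | [], [] => false
  | [], _ :: _ => true
  | _ :: _, [] => false
  | x :: xs, y :: ys => if intListLt x y then true else if intListLt y x then false else matListLt xs ys

def pLt (a b : Int × List (List Int)) : Bool :=
  if a.1 < b.1 then true else if b.1 < a.1 then false else matListLt a.2 b.2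

-- heapq.heappush/heappop ported as a priority queue kept as a list sorted by the same
-- ordering (push = ordered insert, pop = head): observationally exact, since heappop returns a
-- minimal element under [c, mat]-order and any tie is between equal values.
def hinsert (e : Int × List (List Int)) : List (Int × List (List Int)) → List (Int × List (List Int))
  | [] => [e]
  | x :: xs => if pLt e x then e :: x :: xs else x :: hinsert e xs

-- termination measure for A's while-q loop
def w5 (c : Int) : Nat := 5 ^ (6 - c).toNat

def measQ (q : List (Int × List (List Int))) : Nat := (q.map (fun p => w5 p.1)).sum

theorem measQ_cons (p : Int × List (List Int)) (q : List (Int × List (List Int))) :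
    measQ (p :: q) = w5 p.1 + measQ q := by
  simp [measQ]

theorem measQ_hinsert (e : Int × List (List Int)) (l : List (Int × List (List Int))) :
    measQ (hinsert e l) = w5 e.1 + measQ l := by
  induction l with
  | nil => simp [hinsert, measQ]
  | cons x xs ih =>
    simp only [hinsert]
    split
    · simp [measQ]
    · rw [measQ_cons, ih, measQ_cons]; omega

theorem measQ_foldl_step (c : Int) (m : List (List Int)) (N : Int) (l : List Int)
    (s : List (Int × List (List Int)) × Int) :
    measQ ((l.foldl (fun s dr =>
        (hinsert (c + 1, move dr m N) s.1, max s.2 (calcMax (move dr m N)))) s).1)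
      = measQ s.1 + l.length * w5 (c + 1) := by
  induction l generalizing s with
  | nil => simp
  | cons x xs ih =>
    simp only [List.foldl_cons, List.length_cons]
    rw [ih, measQ_hinsert]
    ring

theorem w5_step (c : Int) (hc : c < 5) : 4 * w5 (c + 1) < w5 c := by
  unfold w5
  have e1 : (6 - (c + 1)).toNat = (5 - c).toNat := by omega
  have e2 : (6 - c).toNat = (5 - c).toNat + 1 := by omega
  rw [e1, e2, pow_succ]
  have h1 : 1 ≤ 5 ^ (5 - c).toNat := Nat.one_le_pow _ _ (by omega)
  omega

-- A's while-q loop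
def loopA (N : Int) : List (Int × List (List Int)) → Int → Int
  | [], maxNum => maxNum
  | (c, m) :: rest, maxNum =>
    if h : 5 ≤ c then maxNum
    else
      let st := (PySem.List.pyRange 0 4 1).foldl
        (fun (s : List (Int × List (List Int)) × Int) dr =>
          (hinsert (c + 1, move dr m N) s.1, max s.2 (calcMax (move dr m N)))) (rest, maxNum)
      loopA N st.1 st.2
termination_by q _ => measQ q
decreasing_by
  have hw := w5_step c (by omega)
  have hlen : (PySem.List.pyRange 0 4 1).length = 4 := by decide
  simp only [measQ_foldl_step, measQ_cons, hlen]
  omega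

def solve (mat : List (List Int)) (N : Int) : Int :=
  loopA N (hinsert (0, mat) []) (-1)

-- ===== PORT B =====
-- merge(xs): recursive pairwise merge of adjacent equal tiles
def merge_alt : List Int → List Int
  | x :: y :: rest => if x = y then (2 * x) :: merge_alt rest else x :: merge_alt (y :: rest)
  | [x] => [x]
  | [] => []

-- slide(line): drop zeros, merge, pad with zeros up to N
def slide_alt (N : Int) (line : List Int) : List Int :=
  let m := merge_alt (line.filter (fun x => x ≠ 0))
  m ++ List.replicate (N - (m.length : Int)).toNat 0

-- rslide(line): slide toward the tail of the line
def rslide_alt (N : Int) (line : List Int) : List Int :=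
  (slide_alt N line.reverse).reverse

-- m[i][j]
def cell_alt (m : List (List Int)) (i j : Int) : Int :=
  (PySem.List.pyGet? ((PySem.List.pyGet? m i).getD []) j).getD 0

-- move(dr, m): each moved line is built as a fresh list
def move_alt (dr : Int) (m : List (List Int)) (N : Int) : List (List Int) :=
  if dr = 0 then
    let cols := (PySem.List.pyRange 0 N 1).map
      (fun j => slide_alt N ((PySem.List.pyRange 0 N 1).map (fun i => cell_alt m i j)))
    (PySem.List.pyRange 0 N 1).map
      (fun i => (PySem.List.pyRange 0 N 1).map
        (fun j => (PySem.List.pyGet? ((PySem.List.pyGet? cols j).getD []) i).getD 0))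
  else if dr = 1 then
    let cols := (PySem.List.pyRange 0 N 1).map
      (fun j => rslide_alt N ((PySem.List.pyRange 0 N 1).map (fun i => cell_alt m i j)))
    (PySem.List.pyRange 0 N 1).map
      (fun i => (PySem.List.pyRange 0 N 1).map
        (fun j => (PySem.List.pyGet? ((PySem.List.pyGet? cols j).getD []) i).getD 0))
  else if dr = 2 then
    (PySem.List.pyRange 0 N 1).map (fun i => slide_alt N ((PySem.List.pyGet? m i).getD []))
  else
    (PySem.List.pyRange 0 N 1).map (fun i => rslide_alt N ((PySem.List.pyGet? m i).getD []))

-- score(m): running maximum over all cells, seeded with -1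
def score_alt (m : List (List Int)) : Int :=
  m.foldl (fun best row => row.foldl (fun b x => max b x) best) (-1)

-- best_from(m, remaining): recursive DFS over the move tree
def bestFrom_alt (N : Int) : List (List Int) → Nat → Int
  | _, 0 => -1
  | m, r + 1 =>
    (PySem.List.pyRange 0 4 1).foldl
      (fun best dr =>
        max (max best (score_alt (move_alt dr m N))) (bestFrom_alt N (move_alt dr m N) r)) (-1)

def solve_alt (mat : List (List Int)) (N : Int) : Int :=
  bestFrom_alt N mat 5

-- ===== PRECONDITION & SPEC =====
-- Pre_ excludes the inputs where mat is not an N×N matrix (for N > 0): there Python's A raises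
-- IndexError on a column/row access or an out-of-range write in move for almost every input
-- (a few degenerate ragged shapes happen to survive; see the cite); for N ≤ 0 A returns -1
-- for any mat and is admitted.
def Pre_solve (mat : List (List Int)) (N : Int) : Prop :=
  N ≤ 0 ∨ ((mat.length : Int) = N ∧ ∀ r ∈ mat, (r.length : Int) = N)
instance (mat : List (List Int)) (N : Int) : Decidable (Pre_solve mat N) := by
  unfold Pre_solve; infer_instance

def pvWitness_solve : List (List Int) × Int := ([[2, 0], [0, 2]], 2)

def Spec_solve (mat : List (List Int)) (N : Int) (out : Int) : Prop := out = solve_alt mat N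
instance (mat : List (List Int)) (N : Int) (out : Int) : Decidable (Spec_solve mat N out) := by
  unfold Spec_solve; infer_instance

-- ===== CLAIM (what is proved, stated in full; the proofs are below) =====
def Claim_equal_solve : Prop := ∀ (mat : List (List Int)) (N : Int),
  Dom_solve mat N → Pre_solve mat N → Spec_solve mat N (solve mat N)

-- ===== LEMMAS AND PROOFS =====


-- ---------- generic indexed-rewrite toolkit ----------

def rap {α : Type} (G : Nat → α → α) : Nat → List α → List α
  | _, [] => []
  | k, x :: xs => G k x :: rap G (k + 1) xs

theorem length_rap {α : Type} (G : Nat → α → α) :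
    ∀ (k : Nat) (l : List α), (rap G k l).length = l.length := by
  intro k l
  induction l generalizing k with
  | nil => rfl
  | cons x xs ih => simp [rap, ih]

theorem getElem_rap {α : Type} (G : Nat → α → α) :
    ∀ (k : Nat) (l : List α) (i : Nat) (hi : i < (rap G k l).length),
      (rap G k l)[i] = G (k + i) (l[i]'(by rw [length_rap] at hi; exact hi)) := by
  intro k l
  induction l generalizing k with
  | nil => intro i hi; simp [rap] at hi
  | cons x xs ih =>
    intro i hi
    cases i with
    | zero => simp [rap]
    | succ j =>
      have hj : j < (rap G (k + 1) xs).length := by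
        simp only [rap, List.length_cons] at hi
        omega
      have := ih (k + 1) j hj
      simp only [rap, List.getElem_cons_succ]
      rw [this]
      congr 1
      omega

theorem rap_rap {α : Type} (G H : Nat → α → α) :
    ∀ (k : Nat) (l : List α), rap G k (rap H k l) = rap (fun i x => G i (H i x)) k l := by
  intro k l
  induction l generalizing k with
  | nil => rfl
  | cons x xs ih => simp [rap, ih]

theorem rap_id {α : Type} {G : Nat → α → α} :
    ∀ (k : Nat) (l : List α), (∀ i x, k ≤ i → G i x = x) → rap G k l = l := by
  intro k l
  induction l generalizing k with
  | nil => intro _; rfl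
  | cons x xs ih =>
    intro h
    simp only [rap]
    rw [h k x le_rfl, ih (k + 1) (fun i x hi => h i x (by omega))]

theorem rap_foldl_comm {α β : Type} (G : β → Nat → α → α) :
    ∀ (ls : List β) (M : List α),
      ls.foldl (fun M ℓ => rap (fun i x => G ℓ i x) 0 M) M
        = rap (fun i x => ls.foldl (fun x ℓ => G ℓ i x) x) 0 M := by
  intro ls
  induction ls with
  | nil =>
    intro M
    simp only [List.foldl_nil]
    exact (rap_id 0 M (fun _ _ _ => rfl)).symm
  | cons ℓ rest ih =>
    intro M
    simp only [List.foldl_cons]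
    rw [ih, rap_rap]

-- guarded write-at-index step (ascending position = the loop variable itself)
def gstep {α : Type} (d : α) (c : Int → Bool) (f : Int → α → α) (m : List α) (i : Int) : List α :=
  if c i then
    (if 0 ≤ i ∧ i < (m.length : Int) then m.set i.toNat (f i (m.getD i.toNat d)) else m)
  else m

-- guarded write-at-index step (descending position len-1-i)
def gstepR {α : Type} (d : α) (f : Int → α → α) (m : List α) (i : Int) : List α :=
  if 0 ≤ (m.length : Int) - 1 - i ∧ (m.length : Int) - 1 - i < (m.length : Int) then
    m.set ((m.length : Int) - 1 - i).toNat (f i (m.getD ((m.length : Int) - 1 - i).toNat d))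
  else m

theorem length_gstep {α : Type} (d : α) (c : Int → Bool) (f : Int → α → α) (m : List α) (i : Int) :
    (gstep d c f m i).length = m.length := by
  unfold gstep; split <;> [skip; rfl]
  split <;> simp

theorem length_gstepR {α : Type} (d : α) (f : Int → α → α) (m : List α) (i : Int) :
    (gstepR d f m i).length = m.length := by
  unfold gstepR; split <;> simp

theorem foldl_gstep_asc {α : Type} (d : α) (c : Int → Bool) (f : Int → α → α) (b : Nat) :
    ∀ (t k : Nat) (M : List α), b ≤ M.length → k + t = b →
      (PySem.List.pyRange (k : Int) (b : Int) 1).foldl (gstep d c f) M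
        = rap (fun i x => if k ≤ i ∧ i < b ∧ c (i : Int) = true then f (i : Int) x else x) 0 M := by
  intro t
  induction t with
  | zero =>
    intro k M hb hk
    have hkb : k = b := by omega
    subst hkb
    rw [PySem.List.pyRange_one_eq_nil le_rfl, List.foldl_nil]
    refine (rap_id 0 M (fun i x _ => ?_)).symm
    rw [if_neg]
    rintro ⟨a, b, _⟩; omega
  | succ t ih =>
    intro k M hb hk
    have hkb : k < b := by omega
    rw [PySem.List.pyRange_one_cons (by exact_mod_cast hkb), List.foldl_cons]
    have hcast : (k : Int) + 1 = ((k + 1 : Nat) : Int) := by push_cast; ring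
    rw [hcast, ih (k + 1) (gstep d c f M (k : Int)) (by rw [length_gstep]; exact hb) (by omega)]
    have hkM : k < M.length := by omega
    apply List.ext_getElem
    · rw [length_rap, length_rap, length_gstep]
    · intro n h1 h2
      rw [getElem_rap, getElem_rap]
      simp only [Nat.zero_add]
      have hn : n < M.length := by rw [length_rap] at h2; exact h2
      by_cases hck : c (k : Int) = true
      · have hg : gstep d c f M (k : Int) = M.set k (f (k : Int) (M[k]'hkM)) := by
          unfold gstep
          rw [if_pos hck, if_pos (by constructor <;> [positivity; exact_mod_cast hkM])]
          rw [Int.toNat_natCast, List.getD_eq_getElem?_getD, List.getElem?_eq_getElem hkM]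
          rfl
        simp only [hg]
        by_cases hnk : n = k
        · subst hnk
          rw [List.getElem_set_self, if_neg (by rintro ⟨a, _, _⟩; omega),
            if_pos ⟨le_rfl, hkb, hck⟩]
        · rw [List.getElem_set_ne (by omega)]
          by_cases hc1 : k + 1 ≤ n ∧ n < b ∧ c (n : Int) = true
          · rw [if_pos hc1, if_pos ⟨by omega, hc1.2⟩]
          · rw [if_neg hc1, if_neg (fun hc2 => hc1 ⟨by omega, hc2.2⟩)]
      · have hg : gstep d c f M (k : Int) = M := by unfold gstep; rw [if_neg hck]
        simp only [hg]
        by_cases hc1 : k + 1 ≤ n ∧ n < b ∧ c (n : Int) = true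
        · rw [if_pos hc1, if_pos ⟨by omega, hc1.2⟩]
        · rw [if_neg hc1, if_neg]
          rintro ⟨ha, hb', hcc⟩
          have hnk : n = k := by
            by_cases h : k + 1 ≤ n
            · exact absurd ⟨h, hb', hcc⟩ hc1
            · omega
          subst hnk
          exact hck hcc

theorem foldl_gstepR_desc {α : Type} (d : α) (f : Int → α → α) (L : Nat) :
    ∀ (t k : Nat) (M : List α), L ≤ M.length → k + t = L →
      (PySem.List.pyRange (k : Int) (L : Int) 1).foldl (gstepR d f) M
        = rap (fun rI x => if M.length - L ≤ rI ∧ rI < M.length - k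
            then f ((M.length : Int) - 1 - (rI : Int)) x else x) 0 M := by
  intro t
  induction t with
  | zero =>
    intro k M hb hk
    have hkb : k = L := by omega
    subst hkb
    rw [PySem.List.pyRange_one_eq_nil le_rfl, List.foldl_nil]
    refine (rap_id 0 M (fun i x _ => ?_)).symm
    rw [if_neg]
    rintro ⟨a, b⟩; omega
  | succ t ih =>
    intro k M hb hk
    have hkb : k < L := by omega
    rw [PySem.List.pyRange_one_cons (by exact_mod_cast hkb), List.foldl_cons]
    have hcast : (k : Int) + 1 = ((k + 1 : Nat) : Int) := by push_cast; ring
    rw [hcast, ih (k + 1) (gstepR d f M (k : Int)) (by rw [length_gstepR]; exact hb) (by omega)]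
    have hp : M.length - 1 - k < M.length := by omega
    have hg : gstepR d f M (k : Int)
        = M.set (M.length - 1 - k) (f (k : Int) (M[M.length - 1 - k]'hp)) := by
      unfold gstepR
      rw [if_pos (by constructor <;> omega)]
      have e : ((M.length : Int) - 1 - (k : Int)).toNat = M.length - 1 - k := by omega
      rw [e, List.getD_eq_getElem?_getD, List.getElem?_eq_getElem hp]
      rfl
    apply List.ext_getElem
    · rw [length_rap, length_rap, length_gstepR]
    · intro n h1 h2
      rw [getElem_rap, getElem_rap]
      simp only [Nat.zero_add, length_gstepR]
      have hn : n < M.length := by rw [length_rap] at h2; exact h2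
      simp only [hg]
      by_cases hnk : n = M.length - 1 - k
      · subst hnk
        rw [List.getElem_set_self, if_neg (by rintro ⟨_, hx⟩; omega),
          if_pos ⟨by omega, by omega⟩]
        congr 1
        omega
      · rw [List.getElem_set_ne (by omega)]
        by_cases hc1 : M.length - L ≤ n ∧ n < M.length - (k + 1)
        · rw [if_pos hc1, if_pos ⟨hc1.1, by omega⟩]
        · rw [if_neg hc1, if_neg (by rintro ⟨ha, hb'⟩; exact hc1 ⟨ha, by omega⟩)]

theorem foldl_invar_congr {α β : Type} (P : α → Prop) (f g : α → β → α) :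
    ∀ (l : List β) (a : α), P a →
      (∀ a x, x ∈ l → P a → f a x = g a x ∧ P (f a x)) →
      l.foldl f a = l.foldl g a ∧ P (l.foldl f a) := by
  intro l
  induction l with
  | nil => exact fun a ha _ => ⟨rfl, ha⟩
  | cons x xs ih =>
    intro a ha h
    obtain ⟨he, hp⟩ := h a x List.mem_cons_self ha
    simp only [List.foldl_cons]
    obtain ⟨h1, h2⟩ := ih (f a x) hp (fun a y hy ha => h a y (List.mem_cons_of_mem _ hy) ha)
    rw [← he]
    exact ⟨h1, h2⟩

theorem pyGetD_eq_getD {α : Type} (l : List α) (i : Int) (d : α) (h0 : 0 ≤ i) :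
    (PySem.List.pyGet? l i).getD d = l.getD i.toNat d := by
  rw [PySem.List.pyGet?_of_nonneg l h0, List.getD_eq_getElem?_getD]

theorem fold_set2_row (p w : Int → Int) :
    ∀ (js : List Int) (i : Int) (mv : List (List Int)), 0 ≤ i → i < (mv.length : Int) →
      js.foldl (fun m j => set2 m i (p j) (w j)) mv
        = mv.set i.toNat (js.foldl (fun r j => pySet r (p j) (w j)) ((PySem.List.pyGet? mv i).getD [])) := by
  intro js
  induction js with
  | nil =>
    intro i mv h0 hlt
    simp only [List.foldl_nil]
    rw [pyGetD_eq_getD _ _ _ h0, List.getD_eq_getElem?_getD,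
      List.getElem?_eq_getElem (by omega), Option.getD_some, List.set_getElem_self]
  | cons j js ih =>
    intro i mv h0 hlt
    simp only [List.foldl_cons]
    have hset2 : set2 mv i (p j) (w j)
        = mv.set i.toNat (pySet ((PySem.List.pyGet? mv i).getD []) (p j) (w j)) := by
      unfold set2; rw [if_pos ⟨h0, hlt⟩]
    rw [hset2, ih i _ h0 (by simpa using hlt)]
    rw [List.set_set]
    congr 1
    rw [pyGetD_eq_getD _ _ _ h0, List.getD_eq_getElem?_getD,
      List.getElem?_eq_getElem (by rw [List.length_set]; omega)]
    have hi : i.toNat < mv.length := by omega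
    simp [List.getElem_set_self]

-- ---------- merge / slide characterization ----------

theorem mergeLoop_asc (col : List Int) :
    ∀ (fuel k : Nat) (acc : List Int), k < col.length → col.length - k ≤ fuel →
      mergeLoop col (col.length : Int) 1 (k : Int) acc fuel = acc ++ merge_alt (col.drop k) := by
  intro fuel
  induction fuel with
  | zero => intro k acc hk hf; omega
  | succ fuel ih =>
    intro k acc hk hf
    have hn0 : (col.length : Int) ≠ 0 := by
      simp only [ne_eq, Nat.cast_eq_zero]; omega
    have hgk : (PySem.List.pyGet? col (k : Int)).getD 0 = col[k] := by
      rw [PySem.List.pyGet?_natCast, List.getElem?_eq_getElem hk]; rfl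
    have hdropk : col.drop k = col[k] :: col.drop (k + 1) := List.drop_eq_getElem_cons hk
    by_cases hlt : k + 1 < col.length
    · have hgk1 : (PySem.List.pyGet? col ((k : Int) + 1)).getD 0 = col[k + 1] := by
        have : (k : Int) + 1 = ((k + 1 : Nat) : Int) := by push_cast; ring
        rw [this, PySem.List.pyGet?_natCast, List.getElem?_eq_getElem hlt]; rfl
      have hdropk1 : col.drop (k + 1) = col[k + 1] :: col.drop (k + 2) :=
        List.drop_eq_getElem_cons hlt
      by_cases heq : col[k] = col[k + 1]
      · -- merge branch
        have hcond : 0 ≤ (k : Int) + 1 ∧ (k : Int) + 1 < (col.length : Int) ∧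
            (PySem.List.pyGet? col (k : Int)).getD 0
              = (PySem.List.pyGet? col ((k : Int) + 1)).getD 0 := by
          refine ⟨by positivity, by exact_mod_cast hlt, by rw [hgk, hgk1]; exact heq⟩
        simp only [mergeLoop, if_neg hn0, if_pos hcond]
        have hmrg : merge_alt (col.drop k) = 2 * col[k] :: merge_alt (col.drop (k + 2)) := by
          rw [hdropk, hdropk1, merge_alt, if_pos heq]
        by_cases hstop : (k : Int) + 2 * 1 < 0 ∨ (col.length : Int) ≤ (k : Int) + 2 * 1
        · rw [if_pos hstop]
          have hd : col.drop (k + 2) = [] := List.drop_of_length_le (by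
            rcases hstop with h | h
            · omega
            · have : col.length ≤ k + 2 := by exact_mod_cast (by linarith : (col.length : Int) ≤ (k : Int) + 2)
              omega)
          rw [hmrg, hd, hgk]
          simp [merge_alt, mul_comm]
        · rw [if_neg hstop]
          have hk2 : k + 2 < col.length := by
            rcases not_or.1 hstop with ⟨h1, h2⟩
            have h2' : (k : Int) + 2 * 1 < (col.length : Int) := lt_of_not_ge (fun h => h2 (by linarith))
            push_cast at h2'
            omega
          have hcast : (k : Int) + 2 * 1 = ((k + 2 : Nat) : Int) := by push_cast; ring
          rw [hcast, ih (k + 2) (acc ++ [(PySem.List.pyGet? col (k : Int)).getD 0 * 2]) hk2 (by omega)]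
          rw [hgk, hmrg, List.append_assoc]
          simp [mul_comm]
      · -- no merge: unequal neighbours
        have hcond : ¬ (0 ≤ (k : Int) + 1 ∧ (k : Int) + 1 < (col.length : Int) ∧
            (PySem.List.pyGet? col (k : Int)).getD 0
              = (PySem.List.pyGet? col ((k : Int) + 1)).getD 0) := by
          rintro ⟨_, _, h⟩
          rw [hgk, hgk1] at h
          exact heq h
        simp only [mergeLoop, if_neg hn0, if_neg hcond]
        have hstop : ¬ ((k : Int) + 1 * 1 < 0 ∨ (col.length : Int) ≤ (k : Int) + 1 * 1) := by
          push_neg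
          constructor <;> [omega; exact_mod_cast hlt]
        rw [if_neg hstop]
        have hcast : (k : Int) + 1 * 1 = ((k + 1 : Nat) : Int) := by push_cast; ring
        rw [hcast, ih (k + 1) (acc ++ [(PySem.List.pyGet? col (k : Int)).getD 0]) hlt (by omega)]
        rw [hgk, hdropk, hdropk1, merge_alt, if_neg heq, ← hdropk1, List.append_assoc]
        rfl
    · -- k is the last index
      have hk1 : k + 1 = col.length := by omega
      have hcond : ¬ (0 ≤ (k : Int) + 1 ∧ (k : Int) + 1 < (col.length : Int) ∧
          (PySem.List.pyGet? col (k : Int)).getD 0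
            = (PySem.List.pyGet? col ((k : Int) + 1)).getD 0) := by
        rintro ⟨_, h, _⟩
        have : k + 1 < col.length := by exact_mod_cast h
        omega
      simp only [mergeLoop, if_neg hn0, if_neg hcond]
      have hstop : (k : Int) + 1 * 1 < 0 ∨ (col.length : Int) ≤ (k : Int) + 1 * 1 := by
        right
        push_cast
        omega
      rw [if_pos hstop]
      have hd : col.drop (k + 1) = [] := List.drop_of_length_le (by omega)
      rw [hdropk, hd, hgk]
      simp [merge_alt]


theorem take_succ_reverse (col : List Int) (k : Nat) (hk : k < col.length) :
    (col.take (k + 1)).reverse = col[k] :: (col.take k).reverse := by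
  rw [List.take_succ, List.getElem?_eq_getElem hk]
  simp

theorem mergeLoop_desc (col : List Int) :
    ∀ (fuel k : Nat) (acc : List Int), k < col.length → k + 1 ≤ fuel →
      mergeLoop col (col.length : Int) (-1) (k : Int) acc fuel
        = acc ++ merge_alt ((col.take (k + 1)).reverse) := by
  intro fuel
  induction fuel with
  | zero => intro k acc hk hf; omega
  | succ fuel ih =>
    intro k acc hk hf
    have hn0 : (col.length : Int) ≠ 0 := by
      simp only [ne_eq, Nat.cast_eq_zero]; omega
    have hgk : (PySem.List.pyGet? col (k : Int)).getD 0 = col[k] := by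
      rw [PySem.List.pyGet?_natCast, List.getElem?_eq_getElem hk]; rfl
    have htk : (col.take (k + 1)).reverse = col[k] :: (col.take k).reverse :=
      take_succ_reverse col k hk
    by_cases hpos : 1 ≤ k
    · have hk1 : k - 1 < col.length := by omega
      have hgk1 : (PySem.List.pyGet? col ((k : Int) + -1)).getD 0 = col[k - 1]'hk1 := by
        have : (k : Int) + -1 = ((k - 1 : Nat) : Int) := by omega
        rw [this, PySem.List.pyGet?_natCast, List.getElem?_eq_getElem hk1]; rfl
      have htk1 : (col.take k).reverse = col[k - 1]'hk1 :: (col.take (k - 1)).reverse := by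
        have h := take_succ_reverse col (k - 1) hk1
        rw [show k - 1 + 1 = k from by omega] at h
        exact h
      by_cases heq : col[k] = col[k - 1]'hk1
      · have hcond : 0 ≤ (k : Int) + -1 ∧ (k : Int) + -1 < (col.length : Int) ∧
            (PySem.List.pyGet? col (k : Int)).getD 0
              = (PySem.List.pyGet? col ((k : Int) + -1)).getD 0 := by
          refine ⟨by omega, by push_cast; omega, by rw [hgk, hgk1]; exact heq⟩
        simp only [mergeLoop, if_neg hn0, if_pos hcond]
        have hmrg : merge_alt ((col.take (k + 1)).reverse)
            = 2 * col[k] :: merge_alt ((col.take (k - 1)).reverse) := by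
          rw [htk, htk1, merge_alt, if_pos heq]
        by_cases hstop : (k : Int) + 2 * -1 < 0 ∨ (col.length : Int) ≤ (k : Int) + 2 * -1
        · rw [if_pos hstop]
          have hk1' : k = 1 := by
            rcases hstop with h | h
            · omega
            · push_cast at h; omega
          subst hk1'
          rw [hmrg, hgk]
          simp [merge_alt, mul_comm]
        · rw [if_neg hstop]
          have hk2 : 2 ≤ k := by
            rcases not_or.1 hstop with ⟨h1, _⟩
            omega
          have hcast : (k : Int) + 2 * -1 = ((k - 2 : Nat) : Int) := by omega
          rw [hcast, ih (k - 2) (acc ++ [(PySem.List.pyGet? col (k : Int)).getD 0 * 2]) (by omega) (by omega)]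
          have : k - 2 + 1 = k - 1 := by omega
          rw [this, hgk, hmrg, List.append_assoc]
          simp [mul_comm]
      · have hcond : ¬ (0 ≤ (k : Int) + -1 ∧ (k : Int) + -1 < (col.length : Int) ∧
            (PySem.List.pyGet? col (k : Int)).getD 0
              = (PySem.List.pyGet? col ((k : Int) + -1)).getD 0) := by
          rintro ⟨_, _, h⟩
          rw [hgk, hgk1] at h
          exact heq h
        simp only [mergeLoop, if_neg hn0, if_neg hcond]
        have hstop : ¬ ((k : Int) + 1 * -1 < 0 ∨ (col.length : Int) ≤ (k : Int) + 1 * -1) := by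
          rw [not_or]
          constructor
          · omega
          · rw [not_le]; push_cast; omega
        rw [if_neg hstop]
        have hcast : (k : Int) + 1 * -1 = ((k - 1 : Nat) : Int) := by omega
        rw [hcast, ih (k - 1) (acc ++ [(PySem.List.pyGet? col (k : Int)).getD 0]) hk1 (by omega)]
        have : k - 1 + 1 = k := by omega
        rw [this, hgk, htk, htk1, merge_alt, if_neg heq, ← htk1, List.append_assoc]
        rfl
    · -- k = 0
      have hk0 : k = 0 := by omega
      subst hk0
      have hcond' : ¬ (0 ≤ ((0 : Nat) : Int) + -1 ∧ ((0 : Nat) : Int) + -1 < (col.length : Int) ∧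
          (PySem.List.pyGet? col ((0 : Nat) : Int)).getD 0
            = (PySem.List.pyGet? col (((0 : Nat) : Int) + -1)).getD 0) := by
        rintro ⟨h, _, _⟩
        simp at h
      simp only [mergeLoop, if_neg hn0, if_neg hcond']
      have hstop : ((0 : Nat) : Int) + 1 * -1 < 0 ∨ (col.length : Int) ≤ ((0 : Nat) : Int) + 1 * -1 := by
        left; simp
      rw [if_pos hstop, htk, hgk]
      simp [merge_alt]

theorem newCol_asc (col : List Int) :
    mergeLoop col (col.length : Int) 1 0 [] ((col.length : Int).toNat + 1) = merge_alt col := by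
  cases col with
  | nil => simp [mergeLoop, merge_alt]
  | cons x xs =>
    have h0 : (0 : Int) = ((0 : Nat) : Int) := rfl
    rw [h0, mergeLoop_asc (x :: xs) (((x :: xs).length : Int).toNat + 1) 0 [] (by simp) (by simp)]
    simp

theorem newCol_desc (col : List Int) :
    mergeLoop col (col.length : Int) (-1) ((col.length : Int) - 1) [] ((col.length : Int).toNat + 1)
      = merge_alt col.reverse := by
  cases col with
  | nil => simp [mergeLoop, merge_alt]
  | cons x xs =>
    have h0 : ((x :: xs).length : Int) - 1 = ((((x :: xs).length - 1 : Nat)) : Int) := by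
      simp
    rw [h0, mergeLoop_desc (x :: xs) (((x :: xs).length : Int).toNat + 1) ((x :: xs).length - 1) []
      (by simp) (by simp)]
    have : (x :: xs).length - 1 + 1 = (x :: xs).length := by simp
    rw [this, List.take_length]
    simp

theorem merge_alt_length_le : ∀ (l : List Int), (merge_alt l).length ≤ l.length := by
  intro l
  induction l using merge_alt.induct with
  | case1 y rest ih =>
    simp only [merge_alt, if_true]
    simp only [List.length_cons]
    omega
  | case2 x y rest hne ih =>
    simp only [merge_alt]
    rw [if_neg hne]
    simp only [List.length_cons] at *
    omega
  | case3 x => simp [merge_alt]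
  | case4 => simp [merge_alt]

theorem length_foldl_pySet (p w : Int → Int) :
    ∀ (js : List Int) (r : List Int),
      (js.foldl (fun r j => pySet r (p j) (w j)) r).length = r.length := by
  intro js
  induction js with
  | nil => intro r; rfl
  | cons j js ih =>
    intro r
    simp only [List.foldl_cons]
    rw [ih]
    unfold pySet
    split <;> simp


-- ---------- shape, zero matrix, columns, slide entries ----------

def SqG (n : Nat) (m : List (List Int)) : Prop :=
  m.length = n ∧ ∀ i (h : i < m.length), m[i].length = n

theorem zeros_eq (N : Int) :
    (PySem.List.pyRange 0 N 1).map (fun _ => (0 : Int)) = List.replicate N.toNat 0 := by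
  apply List.ext_getElem
  · simp [PySem.List.length_pyRange_one]
  · intro i h1 h2
    simp

theorem mvd0_eq (N : Int) :
    (PySem.List.pyRange 0 N 1).map (fun _ => (PySem.List.pyRange 0 N 1).map (fun _ => (0 : Int)))
      = List.replicate N.toNat (List.replicate N.toNat 0) := by
  apply List.ext_getElem
  · simp [PySem.List.length_pyRange_one]
  · intro i h1 h2
    simp [zeros_eq]

theorem foldl_min_const (n : Nat) :
    ∀ (rs : List (List Int)) (a : Nat), (∀ x ∈ rs, x.length = n) → a = n →
      rs.foldl (fun a x => min a x.length) a = n := by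
  intro rs
  induction rs with
  | nil => intro a _ ha; exact ha
  | cons r rs ih =>
    intro a hmem ha
    simp only [List.foldl_cons]
    exact ih _ (fun x hx => hmem x (List.mem_cons_of_mem _ hx))
      (by rw [ha, hmem r List.mem_cons_self]; exact min_self n)

theorem zipMinLen_eq (mat : List (List Int)) (n : Nat) (h : SqG n mat) (hn : 0 < n) :
    zipMinLen mat = n := by
  obtain ⟨hlen, hrows⟩ := h
  match mat, hlen with
  | r :: rs, hlen =>
    have hmem : ∀ x ∈ r :: rs, x.length = n := by
      intro x hx
      obtain ⟨i, hi, rfl⟩ := List.mem_iff_getElem.1 hx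
      exact hrows i hi
    unfold zipMinLen
    exact foldl_min_const n rs r.length
      (fun x hx => hmem x (List.mem_cons_of_mem _ hx)) (hmem r List.mem_cons_self)
  | [], hlen => simp at hlen; omega

theorem colA_eq (mat : List (List Int)) (n : Nat) (h : SqG n mat) (hn : 0 < n)
    (ℓ : Nat) (hℓ : ℓ < n) :
    (PySem.List.pyGet? (zipStar mat) (ℓ : Int)).getD [] = mat.map (fun r => r.getD ℓ 0) := by
  unfold zipStar
  rw [zipMinLen_eq mat n h hn, PySem.List.pyGet?_natCast,
    List.getElem?_eq_getElem (by simp [hℓ]), Option.getD_some, List.getElem_map,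
    List.getElem_range]

theorem colB_eq (mat : List (List Int)) (n : Nat) (N : Int) (hN : N = (n : Int))
    (h : SqG n mat) (ℓ : Nat) (hℓ : ℓ < n) :
    (PySem.List.pyRange 0 N 1).map (fun i => cell_alt mat i (ℓ : Int))
      = mat.map (fun r => r.getD ℓ 0) := by
  obtain ⟨hlen, hrows⟩ := h
  apply List.ext_getElem
  · simp [PySem.List.length_pyRange_one, hN, hlen]
  · intro i h1 h2
    simp only [List.getElem_map]
    rw [PySem.List.getElem_pyRange_one]
    have hi : i < mat.length := by simp at h2; exact h2
    unfold cell_alt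
    rw [zero_add, PySem.List.pyGet?_natCast mat i, List.getElem?_eq_getElem hi, Option.getD_some,
      PySem.List.pyGet?_natCast _ ℓ, List.getD_eq_getElem?_getD]

theorem length_merge_filt (line : List Int) :
    (merge_alt (line.filter (fun x => x ≠ 0))).length ≤ line.length :=
  le_trans (merge_alt_length_le _) (List.length_filter_le _ _)

theorem length_slide (N : Int) (n : Nat) (hN : N = (n : Int)) (line : List Int)
    (h : line.length ≤ n) : (slide_alt N line).length = n := by
  unfold slide_alt
  have := length_merge_filt line
  simp only [List.length_append, List.length_replicate]
  omega

theorem getD_slide (N : Int) (n : Nat) (hN : N = (n : Int)) (line : List Int)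
    (hlen : line.length ≤ n) (j : Nat) (hj : j < n) :
    (slide_alt N line).getD j 0
      = if j < (merge_alt (line.filter (fun x => x ≠ 0))).length
        then (merge_alt (line.filter (fun x => x ≠ 0))).getD j 0 else 0 := by
  unfold slide_alt
  simp only []
  by_cases hlt : j < (merge_alt (line.filter (fun x => x ≠ 0))).length
  · rw [if_pos hlt]
    rw [List.getD_eq_getElem?_getD, List.getElem?_append_left hlt,
      ← List.getD_eq_getElem?_getD]
  · rw [if_neg hlt]
    rw [List.getD_eq_getElem?_getD, List.getElem?_append_right (by omega)]
    rcases Nat.lt_or_ge (j - (merge_alt (line.filter (fun x => x ≠ 0))).length)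
        (N - ((merge_alt (line.filter (fun x => x ≠ 0))).length : Int)).toNat with hc | hc
    · rw [List.getElem?_eq_getElem (by simpa using hc)]
      simp
    · rw [List.getElem?_eq_none (by simpa using hc)]
      rfl

theorem length_rslide (N : Int) (n : Nat) (hN : N = (n : Int)) (line : List Int)
    (h : line.length ≤ n) : (rslide_alt N line).length = n := by
  unfold rslide_alt
  rw [List.length_reverse, length_slide N n hN line.reverse (by simpa using h)]

theorem getD_rslide (N : Int) (n : Nat) (hN : N = (n : Int)) (line : List Int)
    (hlen : line.length ≤ n) (i : Nat) (hi : i < n) :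
    (rslide_alt N line).getD i 0
      = if n - (merge_alt ((line.filter (fun x => x ≠ 0)).reverse)).length ≤ i
        then (merge_alt ((line.filter (fun x => x ≠ 0)).reverse)).getD (n - 1 - i) 0 else 0 := by
  unfold rslide_alt
  have hsl : (slide_alt N line.reverse).length = n :=
    length_slide N n hN line.reverse (by simpa using hlen)
  have hA : i < (slide_alt N line.reverse).reverse.length := by
    rw [List.length_reverse, hsl]; exact hi
  have hB : n - 1 - i < (slide_alt N line.reverse).length := by
    rw [hsl]; omega
  have hrev : (slide_alt N line.reverse).reverse.getD i 0
      = (slide_alt N line.reverse).getD (n - 1 - i) 0 := by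
    rw [List.getD_eq_getElem?_getD, List.getD_eq_getElem?_getD]
    rw [List.getElem?_eq_getElem hA, List.getElem?_eq_getElem hB]
    simp only [Option.getD_some]
    rw [List.getElem_reverse]
    simp only [hsl]
  rw [hrev, getD_slide N n hN line.reverse (by simpa using hlen) (n - 1 - i) (by omega)]
  rw [List.filter_reverse]
  have hL := length_merge_filt line
  have hL' : (merge_alt ((line.filter (fun x => x ≠ 0)).reverse)).length
      ≤ line.length := by
    have := merge_alt_length_le ((line.filter (fun x => x ≠ 0)).reverse)
    simp only [List.length_reverse] at this
    exact le_trans this (List.length_filter_le _ _)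
  by_cases hc : n - (merge_alt ((line.filter (fun x => x ≠ 0)).reverse)).length ≤ i
  · rw [if_pos (by omega), if_pos hc]
  · rw [if_neg (by omega), if_neg hc]


-- ---------- per-direction equality of move and move_alt ----------

theorem rowfold_eval (N : Int) (n : Nat) (hN : N = (n : Int)) (v : List Int) (hv : v.length ≤ n) :
    (PySem.List.pyRange 0 ((v.length : Nat) : Int) 1).foldl
        (fun r j => pySet r j ((PySem.List.pyGet? v j).getD 0)) (List.replicate n (0 : Int))
      = v ++ List.replicate (n - v.length) 0 := by
  have hfx : (fun (r : List Int) (j : Int) => pySet r j ((PySem.List.pyGet? v j).getD 0))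
      = gstep (0 : Int) (fun _ => true) (fun j _ => (PySem.List.pyGet? v j).getD 0) := by
    funext r j
    unfold pySet gstep
    simp
  rw [hfx]
  have h := foldl_gstep_asc (0 : Int) (fun _ => true) (fun j _ => (PySem.List.pyGet? v j).getD 0)
      v.length v.length 0 (List.replicate n (0 : Int)) (by simp [hv]) (by omega)
  rw [Nat.cast_zero] at h
  rw [h]
  apply List.ext_getElem
  · rw [length_rap]
    simp
    omega
  · intro j h1 h2
    rw [getElem_rap]
    simp only [Nat.zero_add, Nat.le_zero, List.getElem_replicate]
    have hjn : j < n := by rw [length_rap] at h1; simpa using h1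
    by_cases hj : j < v.length
    · rw [if_pos ⟨by omega, hj, by simp⟩]
      rw [PySem.List.pyGet?_natCast, List.getElem?_eq_getElem hj, Option.getD_some,
        List.getElem_append_left hj]
    · rw [if_neg (by rintro ⟨_, h, _⟩; omega)]
      rw [List.getElem_append_right (by omega)]
      simp

def filtA (mat : List (List Int)) (i : Int) : List Int :=
  ((PySem.List.pyGet? mat i).getD []).filter (fun x => x ≠ 0)

def newRA (mat : List (List Int)) (i : Int) : List Int :=
  mergeLoop (filtA mat i) ((filtA mat i).length : Int) 1 0 [] (((filtA mat i).length : Int).toNat + 1)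

theorem newRA_merge (mat : List (List Int)) (i : Int) : newRA mat i = merge_alt (filtA mat i) :=
  newCol_asc _

theorem move2_unfold (mat : List (List Int)) (N : Int) :
    move 2 mat N = (PySem.List.pyRange 0 N 1).foldl
      (fun mvd i =>
        (PySem.List.pyRange 0 ((newRA mat i).length : Int) 1).foldl
          (fun mvd j => set2 mvd i j ((PySem.List.pyGet? (newRA mat i) j).getD 0)) mvd)
      ((PySem.List.pyRange 0 N 1).map (fun _ => (PySem.List.pyRange 0 N 1).map (fun _ => (0 : Int)))) := rfl

theorem move_alt2_unfold (mat : List (List Int)) (N : Int) :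
    move_alt 2 mat N
      = (PySem.List.pyRange 0 N 1).map (fun i => slide_alt N ((PySem.List.pyGet? mat i).getD [])) := rfl

theorem move2_eq (mat : List (List Int)) (n : Nat) (N : Int) (hN : N = (n : Int)) (hn : 0 < n)
    (hsq : SqG n mat) : move 2 mat N = move_alt 2 mat N := by
  obtain ⟨hlen, hrows⟩ := hsq
  rw [move2_unfold, move_alt2_unfold, mvd0_eq]
  simp only [hN, Int.toNat_natCast]
  have hrowlen : ∀ (i : Int), 0 ≤ i → i < (n : Int) →
      ((PySem.List.pyGet? mat i).getD []).length = n := by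
    intro i h0 hi
    have hi' : i.toNat < mat.length := by omega
    rw [PySem.List.pyGet?_of_nonneg mat h0, List.getElem?_eq_getElem hi', Option.getD_some]
    exact hrows _ hi'
  have hnewlen : ∀ (i : Int), 0 ≤ i → i < (n : Int) → (newRA mat i).length ≤ n := by
    intro i h0 hi
    rw [newRA_merge]
    calc (merge_alt (filtA mat i)).length ≤ (filtA mat i).length := merge_alt_length_le _
    _ ≤ ((PySem.List.pyGet? mat i).getD []).length := List.length_filter_le _ _
    _ = n := hrowlen i h0 hi
  have hstep := foldl_invar_congr (SqG n)
      (fun mvd i =>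
        (PySem.List.pyRange 0 ((newRA mat i).length : Int) 1).foldl
          (fun mvd j => set2 mvd i j ((PySem.List.pyGet? (newRA mat i) j).getD 0)) mvd)
      (gstep ([] : List Int) (fun _ => true)
        (fun i r => (PySem.List.pyRange 0 ((newRA mat i).length : Int) 1).foldl
          (fun r j => pySet r j ((PySem.List.pyGet? (newRA mat i) j).getD 0)) r))
      (PySem.List.pyRange 0 (n : Int) 1) (List.replicate n (List.replicate n 0))
      (by constructor <;> simp)
      (by
        intro mv i hi hP
        obtain ⟨hmv, hmvrows⟩ := hP
        obtain ⟨h0, hiN⟩ := (PySem.List.mem_pyRange_one).1 hi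
        have hmvi : i < (mv.length : Int) := by rw [hmv]; omega
        constructor
        · beta_reduce
          rw [fold_set2_row (fun j => j) (fun j => (PySem.List.pyGet? (newRA mat i) j).getD 0)
            _ i mv h0 hmvi]
          unfold gstep
          rw [if_pos rfl, if_pos ⟨h0, hmvi⟩, pyGetD_eq_getD _ _ _ h0]
        · beta_reduce
          rw [fold_set2_row (fun j => j) (fun j => (PySem.List.pyGet? (newRA mat i) j).getD 0)
            _ i mv h0 hmvi]
          constructor
          · rw [List.length_set]; exact hmv
          · intro k hk
            rw [List.length_set] at hk
            by_cases hki : k = i.toNat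
            · subst hki
              rw [List.getElem_set_self]
              rw [length_foldl_pySet]
              rw [pyGetD_eq_getD _ _ _ h0, List.getD_eq_getElem?_getD,
                List.getElem?_eq_getElem (by omega), Option.getD_some]
              exact hmvrows _ _
            · rw [List.getElem_set_ne (by omega)]
              exact hmvrows _ _)
  rw [hstep.1]
  have hga := foldl_gstep_asc ([] : List Int) (fun _ => true)
      (fun i r => (PySem.List.pyRange 0 ((newRA mat i).length : Int) 1).foldl
          (fun r j => pySet r j ((PySem.List.pyGet? (newRA mat i) j).getD 0)) r)
      n n 0 (List.replicate n (List.replicate n 0)) (by simp) (by omega)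
  rw [Nat.cast_zero] at hga
  rw [hga]
  apply List.ext_getElem
  · rw [length_rap]
    simp [PySem.List.length_pyRange_one]
  · intro i h1 h2
    have hin : i < n := by rw [length_rap] at h1; simpa using h1
    rw [getElem_rap]
    simp only [Nat.zero_add, List.getElem_replicate, List.getElem_map]
    rw [if_pos ⟨by omega, hin, by simp⟩]
    rw [PySem.List.getElem_pyRange_one, zero_add]
    have hv : (newRA mat (i : Int)).length ≤ n :=
      hnewlen (i : Int) (by positivity) (by exact_mod_cast hin)
    rw [rowfold_eval ((n : Int)) n rfl (newRA mat (i : Int)) hv]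
    unfold slide_alt
    simp only []
    rw [newRA_merge]
    unfold filtA
    congr 1
    rw [show ((n : Int) - ((merge_alt (((PySem.List.pyGet? mat (i : Int)).getD []).filter (fun x => x ≠ 0))).length : Int)).toNat
        = n - (merge_alt (((PySem.List.pyGet? mat (i : Int)).getD []).filter (fun x => x ≠ 0))).length from by
      have := hnewlen (i : Int) (by positivity) (by exact_mod_cast hin)
      rw [newRA_merge] at this
      unfold filtA at this
      omega]


def newRD (mat : List (List Int)) (i : Int) : List Int :=
  mergeLoop (filtA mat i) ((filtA mat i).length : Int) (-1) (((filtA mat i).length : Int) - 1) []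
    (((filtA mat i).length : Int).toNat + 1)

theorem newRD_merge (mat : List (List Int)) (i : Int) :
    newRD mat i = merge_alt (filtA mat i).reverse :=
  newCol_desc _

theorem move3_unfold (mat : List (List Int)) (N : Int) :
    move 3 mat N = (PySem.List.pyRange 0 N 1).foldl
      (fun mvd i =>
        (PySem.List.pyRange 0 ((newRD mat i).length : Int) 1).foldl
          (fun mvd j => set2 mvd i (N - 1 - j) ((PySem.List.pyGet? (newRD mat i) j).getD 0)) mvd)
      ((PySem.List.pyRange 0 N 1).map (fun _ => (PySem.List.pyRange 0 N 1).map (fun _ => (0 : Int)))) := rfl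

theorem move_alt3_unfold (mat : List (List Int)) (N : Int) :
    move_alt 3 mat N
      = (PySem.List.pyRange 0 N 1).map (fun i => rslide_alt N ((PySem.List.pyGet? mat i).getD [])) := rfl

theorem rowfoldR_eval (n : Nat) (v : List Int) (hv : v.length ≤ n) :
    (PySem.List.pyRange 0 ((v.length : Nat) : Int) 1).foldl
        (fun r j => pySet r ((n : Int) - 1 - j) ((PySem.List.pyGet? v j).getD 0))
        (List.replicate n (0 : Int))
      = List.replicate (n - v.length) 0 ++ v.reverse := by
  have hstep := foldl_invar_congr (fun r : List Int => r.length = n)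
      (fun r j => pySet r ((n : Int) - 1 - j) ((PySem.List.pyGet? v j).getD 0))
      (gstepR (0 : Int) (fun j _ => (PySem.List.pyGet? v j).getD 0))
      (PySem.List.pyRange 0 (v.length : Int) 1) (List.replicate n (0 : Int)) (by simp)
      (by
        intro r j hj hP
        constructor
        · unfold pySet gstepR
          simp only [hP]
        · beta_reduce
          unfold pySet
          split <;> simp [hP])
  rw [hstep.1]
  have hgd := foldl_gstepR_desc (0 : Int) (fun j _ => (PySem.List.pyGet? v j).getD 0)
      v.length v.length 0 (List.replicate n (0 : Int)) (by simp [hv]) (by omega)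
  rw [Nat.cast_zero] at hgd
  rw [hgd]
  apply List.ext_getElem
  · rw [length_rap]
    simp
    omega
  · intro rI h1 h2
    rw [getElem_rap]
    simp only [Nat.zero_add, List.length_replicate, List.getElem_replicate, Nat.sub_zero]
    have hrn : rI < n := by rw [length_rap] at h1; simpa using h1
    by_cases hc : n - v.length ≤ rI
    · rw [if_pos ⟨hc, hrn⟩]
      have hcast : ((n : Int)) - 1 - (rI : Int) = ((n - 1 - rI : Nat) : Int) := by omega
      rw [hcast, PySem.List.pyGet?_natCast, List.getElem?_eq_getElem (by omega), Option.getD_some]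
      rw [List.getElem_append_right (by simpa using hc)]
      rw [List.getElem_reverse]
      congr 1
      simp only [List.length_replicate]
      omega
    · rw [if_neg (by rintro ⟨h, _⟩; omega)]
      rw [List.getElem_append_left (by simpa using (by omega : rI < n - v.length))]
      simp

theorem rslide_closed (n : Nat) (N : Int) (hN : N = (n : Int)) (line : List Int)
    (hlen : line.length ≤ n) :
    rslide_alt N line
      = List.replicate (n - (merge_alt ((line.filter (fun x => x ≠ 0)).reverse)).length) 0
        ++ (merge_alt ((line.filter (fun x => x ≠ 0)).reverse)).reverse := by
  unfold rslide_alt slide_alt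
  simp only []
  rw [List.filter_reverse, List.reverse_append, List.reverse_replicate]
  congr 2
  have h1 : (merge_alt ((line.filter (fun x => x ≠ 0)).reverse)).length ≤ n := by
    have := merge_alt_length_le ((line.filter (fun x => x ≠ 0)).reverse)
    simp only [List.length_reverse] at this
    exact le_trans this (le_trans (List.length_filter_le _ _) hlen)
  omega

theorem move3_eq (mat : List (List Int)) (n : Nat) (N : Int) (hN : N = (n : Int)) (hn : 0 < n)
    (hsq : SqG n mat) : move 3 mat N = move_alt 3 mat N := by
  obtain ⟨hlen, hrows⟩ := hsq
  rw [move3_unfold, move_alt3_unfold, mvd0_eq]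
  simp only [hN, Int.toNat_natCast]
  have hrowlen : ∀ (i : Int), 0 ≤ i → i < (n : Int) →
      ((PySem.List.pyGet? mat i).getD []).length = n := by
    intro i h0 hi
    have hi' : i.toNat < mat.length := by omega
    rw [PySem.List.pyGet?_of_nonneg mat h0, List.getElem?_eq_getElem hi', Option.getD_some]
    exact hrows _ hi'
  have hnewlen : ∀ (i : Int), 0 ≤ i → i < (n : Int) → (newRD mat i).length ≤ n := by
    intro i h0 hi
    rw [newRD_merge]
    calc (merge_alt (filtA mat i).reverse).length
        ≤ (filtA mat i).reverse.length := merge_alt_length_le _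
    _ = (filtA mat i).length := List.length_reverse
    _ ≤ ((PySem.List.pyGet? mat i).getD []).length := List.length_filter_le _ _
    _ = n := hrowlen i h0 hi
  have hstep := foldl_invar_congr (SqG n)
      (fun mvd i =>
        (PySem.List.pyRange 0 ((newRD mat i).length : Int) 1).foldl
          (fun mvd j => set2 mvd i ((n : Int) - 1 - j) ((PySem.List.pyGet? (newRD mat i) j).getD 0)) mvd)
      (gstep ([] : List Int) (fun _ => true)
        (fun i r => (PySem.List.pyRange 0 ((newRD mat i).length : Int) 1).foldl
          (fun r j => pySet r ((n : Int) - 1 - j) ((PySem.List.pyGet? (newRD mat i) j).getD 0)) r))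
      (PySem.List.pyRange 0 (n : Int) 1) (List.replicate n (List.replicate n 0))
      (by constructor <;> simp)
      (by
        intro mv i hi hP
        obtain ⟨hmv, hmvrows⟩ := hP
        obtain ⟨h0, hiN⟩ := (PySem.List.mem_pyRange_one).1 hi
        have hmvi : i < (mv.length : Int) := by rw [hmv]; omega
        constructor
        · beta_reduce
          rw [fold_set2_row (fun j => (n : Int) - 1 - j)
            (fun j => (PySem.List.pyGet? (newRD mat i) j).getD 0) _ i mv h0 hmvi]
          unfold gstep
          rw [if_pos rfl, if_pos ⟨h0, hmvi⟩, pyGetD_eq_getD _ _ _ h0]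
        · beta_reduce
          rw [fold_set2_row (fun j => (n : Int) - 1 - j)
            (fun j => (PySem.List.pyGet? (newRD mat i) j).getD 0) _ i mv h0 hmvi]
          constructor
          · rw [List.length_set]; exact hmv
          · intro k hk
            rw [List.length_set] at hk
            by_cases hki : k = i.toNat
            · subst hki
              rw [List.getElem_set_self]
              rw [length_foldl_pySet]
              rw [pyGetD_eq_getD _ _ _ h0, List.getD_eq_getElem?_getD,
                List.getElem?_eq_getElem (by omega), Option.getD_some]
              exact hmvrows _ _
            · rw [List.getElem_set_ne (by omega)]
              exact hmvrows _ _)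
  rw [hstep.1]
  have hga := foldl_gstep_asc ([] : List Int) (fun _ => true)
      (fun i r => (PySem.List.pyRange 0 ((newRD mat i).length : Int) 1).foldl
          (fun r j => pySet r ((n : Int) - 1 - j) ((PySem.List.pyGet? (newRD mat i) j).getD 0)) r)
      n n 0 (List.replicate n (List.replicate n 0)) (by simp) (by omega)
  rw [Nat.cast_zero] at hga
  rw [hga]
  apply List.ext_getElem
  · rw [length_rap]
    simp [PySem.List.length_pyRange_one]
  · intro i h1 h2
    have hin : i < n := by rw [length_rap] at h1; simpa using h1
    rw [getElem_rap]
    simp only [Nat.zero_add, List.getElem_replicate, List.getElem_map]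
    rw [if_pos ⟨by omega, hin, by simp⟩]
    rw [PySem.List.getElem_pyRange_one, zero_add]
    have hv : (newRD mat (i : Int)).length ≤ n :=
      hnewlen (i : Int) (by positivity) (by exact_mod_cast hin)
    rw [rowfoldR_eval n (newRD mat (i : Int)) hv]
    rw [rslide_closed n ((n : Int)) rfl ((PySem.List.pyGet? mat (i : Int)).getD [])
      (le_of_eq (hrowlen (i : Int) (by positivity) (by exact_mod_cast hin)))]
    rw [newRD_merge]
    unfold filtA
    rfl

theorem foldl_gstep_asc_true {α : Type} (d : α) (f : Int → α → α) (b : Nat) (M : List α)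
    (hb : b ≤ M.length) :
    (PySem.List.pyRange 0 (b : Int) 1).foldl (gstep d (fun _ => true) f) M
      = rap (fun i x => if i < b then f (i : Int) x else x) 0 M := by
  have h := foldl_gstep_asc d (fun _ => true) f b b 0 M hb (by omega)
  rw [Nat.cast_zero] at h
  rw [h]
  apply List.ext_getElem
  · rw [length_rap, length_rap]
  · intro i h1 h2
    rw [getElem_rap, getElem_rap]
    simp only [Nat.zero_add]
    by_cases hc : i < b
    · rw [if_pos ⟨by omega, hc, by simp⟩, if_pos hc]
    · rw [if_neg (by rintro ⟨_, h, _⟩; omega), if_neg hc]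

theorem foldl_gstepR_desc_n {α : Type} (d : α) (f : Int → α → α) (L n : Nat) (M : List α)
    (hM : M.length = n) (hb : L ≤ n) :
    (PySem.List.pyRange 0 (L : Int) 1).foldl (gstepR d f) M
      = rap (fun rI x => if n - L ≤ rI ∧ rI < n then f ((n : Int) - 1 - (rI : Int)) x else x) 0 M := by
  subst hM
  have h := foldl_gstepR_desc d f L L 0 M hb (by omega)
  rw [Nat.cast_zero] at h
  rw [h]
  apply List.ext_getElem
  · rw [length_rap, length_rap]
  · intro i h1 h2
    rw [getElem_rap, getElem_rap]
    simp only [Nat.zero_add, Nat.sub_zero]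

theorem length_pySet (r : List Int) (k v : Int) : (pySet r k v).length = r.length := by
  unfold pySet; split <;> simp

def colBex (mat : List (List Int)) (N : Int) (j : Int) : List Int :=
  (PySem.List.pyRange 0 N 1).map (fun i => cell_alt mat i j)

def cfiltA (mat : List (List Int)) (j : Int) : List Int :=
  ((PySem.List.pyGet? (zipStar mat) j).getD []).filter (fun x => x ≠ 0)

def newCA (mat : List (List Int)) (j : Int) : List Int :=
  mergeLoop (cfiltA mat j) ((cfiltA mat j).length : Int) 1 0 []
    (((cfiltA mat j).length : Int).toNat + 1)

theorem newCA_merge (mat : List (List Int)) (j : Int) : newCA mat j = merge_alt (cfiltA mat j) :=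
  newCol_asc _

theorem move0_unfold (mat : List (List Int)) (N : Int) :
    move 0 mat N = (PySem.List.pyRange 0 N 1).foldl
      (fun mvd j =>
        (PySem.List.pyRange 0 ((newCA mat j).length : Int) 1).foldl
          (fun mvd i => set2 mvd i j ((PySem.List.pyGet? (newCA mat j) i).getD 0)) mvd)
      ((PySem.List.pyRange 0 N 1).map (fun _ => (PySem.List.pyRange 0 N 1).map (fun _ => (0 : Int)))) := rfl

theorem move_alt0_unfold (mat : List (List Int)) (N : Int) :
    move_alt 0 mat N = (PySem.List.pyRange 0 N 1).map
      (fun i => (PySem.List.pyRange 0 N 1).map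
        (fun j => (PySem.List.pyGet?
          ((PySem.List.pyGet? ((PySem.List.pyRange 0 N 1).map
            (fun j => slide_alt N (colBex mat N j))) j).getD []) i).getD 0)) := rfl

theorem move0_eq (mat : List (List Int)) (n : Nat) (N : Int) (hN : N = (n : Int)) (hn : 0 < n)
    (hsq : SqG n mat) : move 0 mat N = move_alt 0 mat N := by
  rw [move0_unfold, move_alt0_unfold, mvd0_eq]
  simp only [hN, Int.toNat_natCast]
  have hcolA : ∀ (j : Int), 0 ≤ j → j < (n : Int) →
      (PySem.List.pyGet? (zipStar mat) j).getD [] = mat.map (fun r => r.getD j.toNat 0) := by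
    intro j h0 hj
    have := colA_eq mat n hsq hn j.toNat (by omega)
    rwa [show ((j.toNat : Nat) : Int) = j from by omega] at this
  have hVlen : ∀ (j : Int), 0 ≤ j → j < (n : Int) → (newCA mat j).length ≤ n := by
    intro j h0 hj
    rw [newCA_merge]
    calc (merge_alt (cfiltA mat j)).length ≤ (cfiltA mat j).length := merge_alt_length_le _
    _ ≤ ((PySem.List.pyGet? (zipStar mat) j).getD []).length := List.length_filter_le _ _
    _ = n := by rw [hcolA j h0 hj, List.length_map, hsq.1]
  have hfx : ∀ (j : Int),
      (fun (mvd : List (List Int)) (i : Int) => set2 mvd i j ((PySem.List.pyGet? (newCA mat j) i).getD 0))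
        = gstep ([] : List (Int)) (fun _ => true)
            (fun i r => pySet r j ((PySem.List.pyGet? (newCA mat j) i).getD 0)) := by
    intro j
    funext mvd i
    unfold set2 gstep
    by_cases h : 0 ≤ i ∧ i < (mvd.length : Int)
    · rw [if_pos h, if_pos rfl, if_pos h, pyGetD_eq_getD _ _ _ h.1]
    · rw [if_neg h, if_pos rfl, if_neg h]
  have hstep := foldl_invar_congr (SqG n)
      (fun mvd j =>
        (PySem.List.pyRange 0 ((newCA mat j).length : Int) 1).foldl
          (fun mvd i => set2 mvd i j ((PySem.List.pyGet? (newCA mat j) i).getD 0)) mvd)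
      (fun mvd j =>
        rap (fun i x => if i < (newCA mat j).length
          then pySet x j ((PySem.List.pyGet? (newCA mat j) (i : Int)).getD 0) else x) 0 mvd)
      (PySem.List.pyRange 0 (n : Int) 1) (List.replicate n (List.replicate n 0))
      (by constructor <;> simp)
      (by
        intro mv j hj hP
        obtain ⟨h0, hjN⟩ := (PySem.List.mem_pyRange_one).1 hj
        have hconv : (PySem.List.pyRange 0 ((newCA mat j).length : Int) 1).foldl
            (fun mvd i => set2 mvd i j ((PySem.List.pyGet? (newCA mat j) i).getD 0)) mv
            = rap (fun i x => if i < (newCA mat j).length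
                then pySet x j ((PySem.List.pyGet? (newCA mat j) (i : Int)).getD 0) else x) 0 mv := by
          rw [hfx j]
          exact foldl_gstep_asc_true ([] : List Int) _ _ mv (by rw [hP.1]; exact hVlen j h0 hjN)
        refine ⟨by beta_reduce; exact hconv, ?_⟩
        beta_reduce
        rw [hconv]
        constructor
        · rw [length_rap]; exact hP.1
        · intro k hk
          rw [getElem_rap]
          simp only [Nat.zero_add]
          rw [length_rap] at hk
          split
          · rw [length_pySet]; exact hP.2 k hk
          · exact hP.2 k hk)
  rw [hstep.1, rap_foldl_comm (fun j i x => if i < (newCA mat j).length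
      then pySet x j ((PySem.List.pyGet? (newCA mat j) (i : Int)).getD 0) else x)]
  apply List.ext_getElem
  · rw [length_rap]
    simp [PySem.List.length_pyRange_one]
  · intro i h1 h2
    have hin : i < n := by rw [length_rap] at h1; simpa using h1
    rw [getElem_rap]
    simp only [Nat.zero_add, List.getElem_replicate, List.getElem_map]
    -- the per-row fold over the column indices
    have hrowconv : (fun (x : List Int) (j : Int) => if i < (newCA mat j).length
          then pySet x j ((PySem.List.pyGet? (newCA mat j) (i : Int)).getD 0) else x)
        = gstep (0 : Int) (fun j => decide (i < (newCA mat j).length))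
            (fun j _ => (PySem.List.pyGet? (newCA mat j) (i : Int)).getD 0) := by
      funext x j
      unfold gstep pySet
      by_cases hc : i < (newCA mat j).length
      · simp [hc]
      · simp [hc]
    rw [hrowconv]
    have hga := foldl_gstep_asc (0 : Int) (fun j => decide (i < (newCA mat j).length))
        (fun j _ => (PySem.List.pyGet? (newCA mat j) (i : Int)).getD 0)
        n n 0 (List.replicate n (0 : Int)) (by simp) (by omega)
    rw [Nat.cast_zero] at hga
    rw [hga]
    apply List.ext_getElem
    · rw [length_rap]
      simp [PySem.List.length_pyRange_one]
    · intro ℓ g1 g2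
      have hℓn : ℓ < n := by rw [length_rap] at g1; simpa using g1
      rw [getElem_rap]
      simp only [Nat.zero_add, List.getElem_replicate, List.getElem_map]
      rw [PySem.List.getElem_pyRange_one, zero_add]
      -- B side entry
      have hcols : (PySem.List.pyGet? ((PySem.List.pyRange 0 (n : Int) 1).map
          (fun j => slide_alt (n : Int) (colBex mat (n : Int) j))) ((ℓ : Nat) : Int)).getD []
          = slide_alt (n : Int) (colBex mat (n : Int) (ℓ : Int)) := by
        rw [PySem.List.pyGet?_natCast, List.getElem?_eq_getElem (by
          simp [PySem.List.length_pyRange_one]; omega), Option.getD_some, List.getElem_map,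
          PySem.List.getElem_pyRange_one, zero_add]
      rw [hcols]
      have hcolB : colBex mat (n : Int) (ℓ : Int) = mat.map (fun r => r.getD ℓ 0) :=
        colB_eq mat n (n : Int) rfl hsq ℓ hℓn
      have hcolA' : cfiltA mat (ℓ : Int) = (mat.map (fun r => r.getD ℓ 0)).filter (fun x => x ≠ 0) := by
        unfold cfiltA
        rw [hcolA (ℓ : Int) (by positivity) (by exact_mod_cast hℓn), Int.toNat_natCast]
      have hlenB : (colBex mat (n : Int) (ℓ : Int)).length ≤ n := by
        rw [hcolB, List.length_map, hsq.1]
      have hmm : merge_alt ((colBex mat (n : Int) (ℓ : Int)).filter (fun x => x ≠ 0))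
          = newCA mat (ℓ : Int) := by
        rw [newCA_merge, hcolA', hcolB]
      rw [PySem.List.getElem_pyRange_one, zero_add]
      rw [PySem.List.pyGet?_natCast (slide_alt ((n : Int)) (colBex mat ((n : Int)) ((ℓ : Nat) : Int))) i,
        ← List.getD_eq_getElem?_getD]
      rw [getD_slide ((n : Int)) n rfl _ hlenB i hin, hmm]
      by_cases hc : i < (newCA mat (ℓ : Int)).length
      · rw [if_pos ⟨by omega, hℓn, by simpa using hc⟩, if_pos hc]
        rw [pyGetD_eq_getD (newCA mat ((ℓ : Nat) : Int)) ((i : Nat) : Int) 0 (by positivity),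
          Int.toNat_natCast]
      · rw [if_neg (by rintro ⟨_, _, h⟩; exact hc (by simpa using h)), if_neg hc]


def newCD (mat : List (List Int)) (j : Int) : List Int :=
  mergeLoop (cfiltA mat j) ((cfiltA mat j).length : Int) (-1) (((cfiltA mat j).length : Int) - 1) []
    (((cfiltA mat j).length : Int).toNat + 1)

theorem newCD_merge (mat : List (List Int)) (j : Int) :
    newCD mat j = merge_alt (cfiltA mat j).reverse :=
  newCol_desc _

theorem length_set2 (m : List (List Int)) (r c v : Int) : (set2 m r c v).length = m.length := by
  unfold set2; split <;> simp

theorem move1_unfold (mat : List (List Int)) (N : Int) :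
    move 1 mat N = (PySem.List.pyRange 0 N 1).foldl
      (fun mvd j =>
        (PySem.List.pyRange 0 ((newCD mat j).length : Int) 1).foldl
          (fun mvd i => set2 mvd (N - 1 - i) j ((PySem.List.pyGet? (newCD mat j) i).getD 0)) mvd)
      ((PySem.List.pyRange 0 N 1).map (fun _ => (PySem.List.pyRange 0 N 1).map (fun _ => (0 : Int)))) := rfl

theorem move_alt1_unfold (mat : List (List Int)) (N : Int) :
    move_alt 1 mat N = (PySem.List.pyRange 0 N 1).map
      (fun i => (PySem.List.pyRange 0 N 1).map
        (fun j => (PySem.List.pyGet?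
          ((PySem.List.pyGet? ((PySem.List.pyRange 0 N 1).map
            (fun j => rslide_alt N (colBex mat N j))) j).getD []) i).getD 0)) := rfl

theorem move1_eq (mat : List (List Int)) (n : Nat) (N : Int) (hN : N = (n : Int)) (hn : 0 < n)
    (hsq : SqG n mat) : move 1 mat N = move_alt 1 mat N := by
  rw [move1_unfold, move_alt1_unfold, mvd0_eq]
  simp only [hN, Int.toNat_natCast]
  have hcolA : ∀ (j : Int), 0 ≤ j → j < (n : Int) →
      (PySem.List.pyGet? (zipStar mat) j).getD [] = mat.map (fun r => r.getD j.toNat 0) := by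
    intro j h0 hj
    have := colA_eq mat n hsq hn j.toNat (by omega)
    rwa [show ((j.toNat : Nat) : Int) = j from by omega] at this
  have hVlen : ∀ (j : Int), 0 ≤ j → j < (n : Int) → (newCD mat j).length ≤ n := by
    intro j h0 hj
    rw [newCD_merge]
    calc (merge_alt (cfiltA mat j).reverse).length
        ≤ (cfiltA mat j).reverse.length := merge_alt_length_le _
    _ = (cfiltA mat j).length := List.length_reverse
    _ ≤ ((PySem.List.pyGet? (zipStar mat) j).getD []).length := List.length_filter_le _ _
    _ = n := by rw [hcolA j h0 hj, List.length_map, hsq.1]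
  have hstep := foldl_invar_congr (SqG n)
      (fun mvd j =>
        (PySem.List.pyRange 0 ((newCD mat j).length : Int) 1).foldl
          (fun mvd i => set2 mvd ((n : Int) - 1 - i) j ((PySem.List.pyGet? (newCD mat j) i).getD 0)) mvd)
      (fun mvd j =>
        rap (fun rI x => if n - (newCD mat j).length ≤ rI ∧ rI < n
          then pySet x j ((PySem.List.pyGet? (newCD mat j) ((n : Int) - 1 - (rI : Int))).getD 0)
          else x) 0 mvd)
      (PySem.List.pyRange 0 (n : Int) 1) (List.replicate n (List.replicate n 0))
      (by constructor <;> simp)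
      (by
        intro mv j hj hP
        obtain ⟨h0, hjN⟩ := (PySem.List.mem_pyRange_one).1 hj
        have hinner := foldl_invar_congr (fun mv : List (List Int) => mv.length = n)
            (fun mvd i => set2 mvd ((n : Int) - 1 - i) j ((PySem.List.pyGet? (newCD mat j) i).getD 0))
            (gstepR ([] : List Int)
              (fun i r => pySet r j ((PySem.List.pyGet? (newCD mat j) i).getD 0)))
            (PySem.List.pyRange 0 ((newCD mat j).length : Int) 1) mv hP.1
            (by
              intro mv' i hi hQ
              constructor
              · beta_reduce
                unfold set2 gstepR
                simp only [hQ]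
                by_cases hg : 0 ≤ (n : Int) - 1 - i ∧ (n : Int) - 1 - i < (n : Int)
                · rw [if_pos hg, if_pos hg, pyGetD_eq_getD _ _ _ hg.1]
                · rw [if_neg hg, if_neg hg]
              · beta_reduce
                rw [length_set2]
                exact hQ)
        have hconv : (PySem.List.pyRange 0 ((newCD mat j).length : Int) 1).foldl
            (fun mvd i => set2 mvd ((n : Int) - 1 - i) j ((PySem.List.pyGet? (newCD mat j) i).getD 0)) mv
            = rap (fun rI x => if n - (newCD mat j).length ≤ rI ∧ rI < n
                then pySet x j ((PySem.List.pyGet? (newCD mat j) ((n : Int) - 1 - (rI : Int))).getD 0)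
                else x) 0 mv := by
          rw [hinner.1]
          exact foldl_gstepR_desc_n ([] : List Int) _ _ n mv hP.1 (hVlen j h0 hjN)
        refine ⟨by beta_reduce; exact hconv, ?_⟩
        beta_reduce
        rw [hconv]
        constructor
        · rw [length_rap]; exact hP.1
        · intro k hk
          rw [getElem_rap]
          simp only [Nat.zero_add]
          rw [length_rap] at hk
          split
          · rw [length_pySet]; exact hP.2 k hk
          · exact hP.2 k hk)
  rw [hstep.1, rap_foldl_comm (fun j rI x => if n - (newCD mat j).length ≤ rI ∧ rI < n
      then pySet x j ((PySem.List.pyGet? (newCD mat j) ((n : Int) - 1 - (rI : Int))).getD 0)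
      else x)]
  apply List.ext_getElem
  · rw [length_rap]
    simp [PySem.List.length_pyRange_one]
  · intro i h1 h2
    have hin : i < n := by rw [length_rap] at h1; simpa using h1
    rw [getElem_rap]
    simp only [Nat.zero_add, List.getElem_replicate, List.getElem_map]
    have hrowconv : (fun (x : List Int) (j : Int) => if n - (newCD mat j).length ≤ i ∧ i < n
          then pySet x j ((PySem.List.pyGet? (newCD mat j) ((n : Int) - 1 - (i : Int))).getD 0) else x)
        = gstep (0 : Int) (fun j => decide (n - (newCD mat j).length ≤ i ∧ i < n))
            (fun j _ => (PySem.List.pyGet? (newCD mat j) ((n : Int) - 1 - (i : Int))).getD 0) := by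
      funext x j
      unfold gstep pySet
      by_cases hc : n - (newCD mat j).length ≤ i ∧ i < n
      · simp [hc]
      · simp [hc]
    rw [hrowconv]
    have hga := foldl_gstep_asc (0 : Int) (fun j => decide (n - (newCD mat j).length ≤ i ∧ i < n))
        (fun j _ => (PySem.List.pyGet? (newCD mat j) ((n : Int) - 1 - (i : Int))).getD 0)
        n n 0 (List.replicate n (0 : Int)) (by simp) (by omega)
    rw [Nat.cast_zero] at hga
    rw [hga]
    apply List.ext_getElem
    · rw [length_rap]
      simp [PySem.List.length_pyRange_one]
    · intro ℓ g1 g2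
      have hℓn : ℓ < n := by rw [length_rap] at g1; simpa using g1
      rw [getElem_rap]
      simp only [Nat.zero_add, List.getElem_replicate, List.getElem_map]
      rw [PySem.List.getElem_pyRange_one, zero_add]
      have hcols : (PySem.List.pyGet? ((PySem.List.pyRange 0 (n : Int) 1).map
          (fun j => rslide_alt (n : Int) (colBex mat (n : Int) j))) ((ℓ : Nat) : Int)).getD []
          = rslide_alt (n : Int) (colBex mat (n : Int) (ℓ : Int)) := by
        rw [PySem.List.pyGet?_natCast, List.getElem?_eq_getElem (by
          simp [PySem.List.length_pyRange_one]; omega), Option.getD_some, List.getElem_map,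
          PySem.List.getElem_pyRange_one, zero_add]
      rw [hcols]
      have hcolB : colBex mat (n : Int) (ℓ : Int) = mat.map (fun r => r.getD ℓ 0) :=
        colB_eq mat n (n : Int) rfl hsq ℓ hℓn
      have hcolA' : cfiltA mat (ℓ : Int) = (mat.map (fun r => r.getD ℓ 0)).filter (fun x => x ≠ 0) := by
        unfold cfiltA
        rw [hcolA (ℓ : Int) (by positivity) (by exact_mod_cast hℓn), Int.toNat_natCast]
      have hlenB : (colBex mat (n : Int) (ℓ : Int)).length ≤ n := by
        rw [hcolB, List.length_map, hsq.1]
      have hmm : merge_alt (((colBex mat (n : Int) (ℓ : Int)).filter (fun x => x ≠ 0)).reverse)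
          = newCD mat (ℓ : Int) := by
        rw [newCD_merge, hcolA', hcolB]
      rw [PySem.List.getElem_pyRange_one, zero_add]
      rw [PySem.List.pyGet?_natCast (rslide_alt ((n : Int)) (colBex mat ((n : Int)) ((ℓ : Nat) : Int))) i,
        ← List.getD_eq_getElem?_getD]
      rw [getD_rslide ((n : Int)) n rfl _ hlenB i hin, hmm]
      by_cases hc : n - (newCD mat (ℓ : Int)).length ≤ i
      · rw [if_pos ⟨by omega, hℓn, by simp [hc, hin]⟩, if_pos hc]
        have hcast : ((n : Int)) - 1 - ((i : Nat) : Int) = (((n - 1 - i : Nat)) : Int) := by omega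
        rw [hcast, pyGetD_eq_getD (newCD mat ((ℓ : Nat) : Int)) _ 0 (by positivity),
          Int.toNat_natCast]
      · rw [if_neg (by rintro ⟨_, _, h⟩; rw [decide_eq_true_eq] at h; exact hc h.1), if_neg hc]


-- ---------- move/score equality on admissible shapes ----------

theorem move_neg (dr : Int) (mat : List (List Int)) (N : Int) (hN : N ≤ 0) :
    move dr mat N = [] := by
  unfold move
  simp only [PySem.List.pyRange_one_eq_nil hN, List.map_nil, List.foldl_nil]
  split <;> split <;> rfl

theorem move_alt_neg (dr : Int) (mat : List (List Int)) (N : Int) (hN : N ≤ 0) :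
    move_alt dr mat N = [] := by
  unfold move_alt
  simp only [PySem.List.pyRange_one_eq_nil hN, List.map_nil]
  split <;> [rfl; split <;> [rfl; split <;> rfl]]

theorem move_alt_sq (dr : Int) (mat : List (List Int)) (n : Nat) (N : Int) (hN : N = (n : Int))
    (hn : 0 < n) (hsq : SqG n mat) : SqG n (move_alt dr mat N) := by
  have hlen := hsq.1
  have hrowlen : ∀ (i : Int), 0 ≤ i → i < (n : Int) →
      ((PySem.List.pyGet? mat i).getD []).length = n := by
    intro i h0 hi
    have hi' : i.toNat < mat.length := by omega
    rw [PySem.List.pyGet?_of_nonneg mat h0, List.getElem?_eq_getElem hi', Option.getD_some]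
    exact hsq.2 _ hi'
  have hNt : N.toNat = n := by rw [hN]; exact Int.toNat_natCast n
  unfold move_alt
  split
  · constructor
    · simp [PySem.List.length_pyRange_one, hNt]
    · intro i h
      rw [List.getElem_map]
      simp [PySem.List.length_pyRange_one, hNt]
  · split
    · constructor
      · simp [PySem.List.length_pyRange_one, hNt]
      · intro i h
        rw [List.getElem_map]
        simp [PySem.List.length_pyRange_one, hNt]
    · split
      · constructor
        · simp [PySem.List.length_pyRange_one, hNt]
        · intro i h
          rw [List.getElem_map]
          rw [PySem.List.getElem_pyRange_one, zero_add]
          have hi : i < n := by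
            simp [PySem.List.length_pyRange_one, hNt] at h
            omega
          exact length_slide N n hN _
            (le_of_eq (hrowlen _ (by positivity) (by exact_mod_cast hi)))
      · constructor
        · simp [PySem.List.length_pyRange_one, hNt]
        · intro i h
          rw [List.getElem_map]
          rw [PySem.List.getElem_pyRange_one, zero_add]
          have hi : i < n := by
            simp [PySem.List.length_pyRange_one, hNt] at h
            omega
          exact length_rslide N n hN _
            (le_of_eq (hrowlen _ (by positivity) (by exact_mod_cast hi)))

theorem move_ok (dr : Int) (hdr : dr = 0 ∨ dr = 1 ∨ dr = 2 ∨ dr = 3)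
    (mat : List (List Int)) (N : Int) (hpre : N ≤ 0 ∨ (0 < N ∧ SqG N.toNat mat)) :
    move dr mat N = move_alt dr mat N
      ∧ (N ≤ 0 ∨ (0 < N ∧ SqG N.toNat (move_alt dr mat N))) := by
  rcases hpre with hneg | ⟨hpos, hsq⟩
  · rw [move_neg dr mat N hneg, move_alt_neg dr mat N hneg]
    exact ⟨rfl, Or.inl hneg⟩
  · have hN : N = (N.toNat : Int) := by omega
    have hn : 0 < N.toNat := by omega
    refine ⟨?_, Or.inr ⟨hpos, move_alt_sq dr mat N.toNat N hN hn hsq⟩⟩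
    rcases hdr with rfl | rfl | rfl | rfl
    · exact move0_eq mat N.toNat N hN hn hsq
    · exact move1_eq mat N.toNat N hN hn hsq
    · exact move2_eq mat N.toNat N hN hn hsq
    · exact move3_eq mat N.toNat N hN hn hsq

theorem foldl_max_comm :
    ∀ (t : List Int) (a x : Int), max a (t.foldl (fun b y => max b y) x)
      = t.foldl (fun b y => max b y) (max a x) := by
  intro t
  induction t with
  | nil => intro a x; rfl
  | cons y ys ih =>
    intro a x
    simp only [List.foldl_cons]
    rw [ih, max_assoc]

theorem calcMax_eq_score (m : List (List Int)) (hm : ∀ r ∈ m, r ≠ []) :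
    calcMax m = score_alt m := by
  unfold calcMax score_alt
  have : ∀ (a : Int),
      m.foldl (fun maxNum i => max maxNum ((PySem.List.max? i (fun y => y)).getD 0)) a
        = m.foldl (fun best row => row.foldl (fun b x => max b x) best) a := by
    induction m with
    | nil => intro a; rfl
    | cons r rs ih =>
      intro a
      simp only [List.foldl_cons]
      have hr : r ≠ [] := hm r List.mem_cons_self
      match r, hr with
      | x :: t, _ =>
        rw [PySem.List.max?_id_cons, Option.getD_some]
        simp only [List.foldl_cons]
        rw [foldl_max_comm]
        exact ih (fun r hr => hm r (List.mem_cons_of_mem _ hr)) _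
  exact this (-1)

theorem pre_rows_ne (m : List (List Int)) (N : Int)
    (h : N ≤ 0 ∨ (0 < N ∧ SqG N.toNat m)) (hneg : N ≤ 0 → m = []) :
    ∀ r ∈ m, r ≠ [] := by
  rcases h with hle | ⟨hpos, hsq⟩
  · rw [hneg hle]
    intro r hr
    simp at hr
  · intro r hr
    obtain ⟨i, hi, rfl⟩ := List.mem_iff_getElem.1 hr
    have := hsq.2 i hi
    intro hcon
    rw [hcon] at this
    simp at this
    omega

-- A's DFS value (proof-level description of what the heap loop computes)
def bestA (N : Int) : List (List Int) → Nat → Int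
  | _, 0 => -1
  | m, r + 1 =>
    (PySem.List.pyRange 0 4 1).foldl
      (fun best dr =>
        max (max best (calcMax (move dr m N))) (bestA N (move dr m N) r)) (-1)

theorem pyRange04 : PySem.List.pyRange 0 4 1 = [0, 1, 2, 3] := by decide

theorem bestA_eq (N : Int) : ∀ (r : Nat) (m : List (List Int)),
    (N ≤ 0 ∨ (0 < N ∧ SqG N.toNat m)) → bestA N m r = bestFrom_alt N m r := by
  intro r
  induction r with
  | zero => intro m _; rfl
  | succ r ih =>
    intro m hm
    have h0 := move_ok 0 (by norm_num) m N hm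
    have h1 := move_ok 1 (by norm_num) m N hm
    have h2 := move_ok 2 (by norm_num) m N hm
    have h3 := move_ok 3 (by norm_num) m N hm
    have hne : ∀ dr : Int, (dr = 0 ∨ dr = 1 ∨ dr = 2 ∨ dr = 3) →
        ∀ r' ∈ move_alt dr m N, r' ≠ [] := by
      intro dr hdr
      exact pre_rows_ne _ N (move_ok dr hdr m N hm).2 (fun hle => move_alt_neg dr m N hle)
    simp only [bestA, bestFrom_alt, pyRange04, List.foldl_cons, List.foldl_nil]
    rw [h0.1, h1.1, h2.1, h3.1]
    rw [calcMax_eq_score _ (hne 0 (by norm_num)), calcMax_eq_score _ (hne 1 (by norm_num)),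
      calcMax_eq_score _ (hne 2 (by norm_num)), calcMax_eq_score _ (hne 3 (by norm_num))]
    rw [ih _ h0.2, ih _ h1.2, ih _ h2.2, ih _ h3.2]


-- ---------- A's heap loop computes the DFS value ----------

-- value of the whole exploration from a queue entry (c, m): the DFS with (5 - c) levels left,
-- folded over the queue
def G (N : Int) (q : List (Int × List (List Int))) (a : Int) : Int :=
  q.foldl (fun acc p => max acc (bestA N p.2 (5 - p.1).toNat)) a

theorem pLt_true_le {a b : Int × List (List Int)} (h : pLt a b = true) : a.1 ≤ b.1 := by
  unfold pLt at h
  split_ifs at h <;> omega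

theorem pLt_false_le {a b : Int × List (List Int)} (h : pLt a b = false) : b.1 ≤ a.1 := by
  unfold pLt at h
  split_ifs at h <;> omega

def SortedQ (q : List (Int × List (List Int))) : Prop :=
  q.Pairwise (fun a b => a.1 ≤ b.1)

theorem mem_hinsert {y e : Int × List (List Int)} {l : List (Int × List (List Int))}
    (h : y ∈ hinsert e l) : y = e ∨ y ∈ l := by
  induction l with
  | nil => simpa [hinsert] using h
  | cons x xs ih =>
    simp only [hinsert] at h
    split at h
    · simpa using h
    · rcases List.mem_cons.1 h with h | h
      · exact Or.inr (by simp [h])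
      · rcases ih h with h | h
        · exact Or.inl h
        · exact Or.inr (List.mem_cons_of_mem _ h)

theorem sorted_hinsert {e : Int × List (List Int)} {l : List (Int × List (List Int))}
    (hl : SortedQ l) : SortedQ (hinsert e l) := by
  induction l with
  | nil => simp [hinsert, SortedQ]
  | cons x xs ih =>
    rcases List.pairwise_cons.1 hl with ⟨hx, hxs⟩
    simp only [hinsert]
    split
    case isTrue hlt =>
      refine List.pairwise_cons.2 ⟨?_, hl⟩
      intro y hy
      rcases List.mem_cons.1 hy with rfl | hy
      · exact pLt_true_le hlt
      · exact le_trans (pLt_true_le hlt) (hx y hy)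
    case isFalse hlt =>
      refine List.pairwise_cons.2 ⟨?_, ih hxs⟩
      intro y hy
      rcases mem_hinsert hy with rfl | hy
      · exact pLt_false_le (by simpa using hlt)
      · exact hx y hy

theorem G_acc (N : Int) (l : List (Int × List (List Int))) (a b : Int) :
    G N l (max a b) = max (G N l a) b := by
  induction l generalizing a with
  | nil => simp [G]
  | cons x xs ih =>
    simp only [G, List.foldl_cons] at *
    rw [max_right_comm, ih]

theorem G_insert (N : Int) (e : Int × List (List Int)) (l : List (Int × List (List Int))) (a : Int) :
    G N (hinsert e l) a = max (G N l a) (bestA N e.2 (5 - e.1).toNat) := by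
  induction l generalizing a with
  | nil => simp [hinsert, G]
  | cons x xs ih =>
    simp only [hinsert]
    split
    · exact G_acc N (x :: xs) a _
    · exact ih (max a (bestA N x.2 (5 - x.1).toNat))

theorem foldl_step_ge {α : Type} (step : Int → α → Int) (h : ∀ a x, a ≤ step a x) :
    ∀ (l : List α) (a : Int), a ≤ l.foldl step a := by
  intro l
  induction l with
  | nil => simp
  | cons x xs ih => intro a; exact le_trans (h a x) (ih _)

theorem calcMax_ge (m : List (List Int)) : -1 ≤ calcMax m := by
  unfold calcMax
  exact foldl_step_ge _ (fun a x => le_max_left _ _) m (-1)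

theorem bestA_ge (N : Int) (m : List (List Int)) (r : Nat) : -1 ≤ bestA N m r := by
  cases r with
  | zero => simp [bestA]
  | succ r =>
    unfold bestA
    exact foldl_step_ge _
      (fun a x => le_trans (le_max_left _ _) (le_max_left _ _)) _ (-1)

theorem G_of_all_ge5 (N : Int) (q : List (Int × List (List Int))) (a : Int)
    (hq : ∀ p ∈ q, (5 : Int) ≤ p.1) (ha : -1 ≤ a) : G N q a = a := by
  induction q generalizing a with
  | nil => simp [G]
  | cons x xs ih =>
    have hx : (5 : Int) ≤ x.1 := hq x (List.mem_cons_self)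
    have h0 : (5 - x.1).toNat = 0 := by omega
    simp only [G, List.foldl_cons, h0]
    rw [show bestA N x.2 0 = -1 from rfl, max_eq_left ha]
    exact ih a (fun p hp => hq p (List.mem_cons_of_mem _ hp)) ha

theorem loopA_eq (N : Int) (k : Nat) :
    ∀ (q : List (Int × List (List Int))) (maxNum : Int), measQ q ≤ k →
      SortedQ q → -1 ≤ maxNum → loopA N q maxNum = G N q maxNum := by
  induction k using Nat.strong_induction_on with
  | _ k ih =>
    intro q maxNum hk hs hm
    match q with
    | [] => rw [loopA.eq_def]; simp [G]
    | (c, m) :: rest =>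
      rw [loopA.eq_def]
      simp only []
      by_cases h5 : 5 ≤ c
      · rw [dif_pos h5]
        refine (G_of_all_ge5 N _ _ ?_ hm).symm
        intro p hp
        rcases List.mem_cons.1 hp with rfl | hp
        · exact h5
        · exact le_trans h5 ((List.pairwise_cons.1 hs).1 p hp)
      · rw [dif_neg h5]
        rw [pyRange04]
        simp only [List.foldl_cons, List.foldl_nil]
        have hrest : SortedQ rest := (List.pairwise_cons.1 hs).2
        set m0 := move 0 m N with hm0
        set m1 := move 1 m N with hm1
        set m2 := move 2 m N with hm2
        set m3 := move 3 m N with hm3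
        set k0 := calcMax m0 with hk0
        set k1 := calcMax m1 with hk1
        set k2 := calcMax m2 with hk2
        set k3 := calcMax m3 with hk3
        set st1 := hinsert (c+1, m3) (hinsert (c+1, m2) (hinsert (c+1, m1) (hinsert (c+1, m0) rest))) with hst1
        set st2 := max (max (max (max maxNum k0) k1) k2) k3 with hst2
        have hsort : SortedQ st1 :=
          sorted_hinsert (sorted_hinsert (sorted_hinsert (sorted_hinsert hrest)))
        have hm2' : -1 ≤ st2 := by
          rw [hst2]; simp only [le_max_iff]; exact Or.inl (Or.inl (Or.inl (Or.inl hm)))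
        have hsum : measQ st1 = measQ rest + 4 * w5 (c + 1) := by
          rw [hst1, measQ_hinsert, measQ_hinsert, measQ_hinsert, measQ_hinsert]; ring
        have hlt : measQ st1 < measQ ((c, m) :: rest) := by
          have hfst : ((c, m) : Int × List (List Int)).1 = c := rfl
          rw [hsum, measQ_cons, hfst]
          have := w5_step c (by omega)
          omega
        have hrec := ih (measQ st1) (lt_of_lt_of_le hlt hk) st1 st2 le_rfl hsort hm2'
        rw [hrec]
        -- both sides are folds of max over the same atoms
        set r := (4 - c).toNat with hr
        have e1 : (5 - (c + 1)).toNat = r := by omega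
        have e2 : (5 - c).toNat = r + 1 := by omega
        rw [hst1, G_insert, G_insert, G_insert, G_insert]
        simp only [e1]
        rw [hst2, G_acc, G_acc, G_acc, G_acc]
        set GR := G N rest maxNum with hGR
        set B0 := bestA N m0 r with hB0
        set B1 := bestA N m1 r with hB1
        set B2 := bestA N m2 r with hB2
        set B3 := bestA N m3 r with hB3
        show _ = G N ((c, m) :: rest) maxNum
        simp only [G, List.foldl_cons]
        rw [show (q : List (Int × List (List Int))) → (a : Int) →
              List.foldl (fun acc p => max acc (bestA N p.2 (5 - p.1).toNat)) a q = G N q a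
            from fun q a => rfl]
        rw [e2]
        rw [G_acc]
        rw [← hGR]
        -- unfold the A-side DFS one level
        conv_rhs => rw [bestA, pyRange04]
        simp only [List.foldl_cons, List.foldl_nil]
        rw [← hm0, ← hm1, ← hm2, ← hm3, ← hk0, ← hk1, ← hk2, ← hk3,
            ← hB0, ← hB1, ← hB2, ← hB3]
        rw [max_eq_right (calcMax_ge m0)]
        clear_value m0 m1 m2 m3 k0 k1 k2 k3 st1 st2 GR B0 B1 B2 B3
        rw [← hk0]
        ac_rfl

-- ===== VERDICT (by name: the statement is the Claim_ definition above) =====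
theorem solve_spec : Claim_equal_solve := by
  intro mat N hdom hpre
  unfold Spec_solve solve solve_alt
  rw [show hinsert (0, mat) [] = [((0 : Int), mat)] from rfl]
  rw [loopA_eq N (measQ [((0 : Int), mat)]) [((0 : Int), mat)] (-1) le_rfl
        (by simp [SortedQ]) le_rfl]
  simp only [G, List.foldl_cons, List.foldl_nil]
  rw [max_eq_right (bestA_ge N mat _)]
  have hpre' : N ≤ 0 ∨ (0 < N ∧ SqG N.toNat mat) := by
    rcases hpre with h | ⟨h1, h2⟩
    · exact Or.inl h
    · by_cases hN0 : N ≤ 0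
      · exact Or.inl hN0
      · refine Or.inr ⟨by omega, ?_, ?_⟩
        · omega
        · intro i hi
          have := h2 mat[i] (List.getElem_mem hi)
          omega
  rw [show ((5 : Int) - 0).toNat = 5 from rfl]
  exact bestA_eq N 5 mat hpre'
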